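/-
  start_decoder (CONTRACTS 113), THE SECOND HALF: the assertions of the 26 segments F1 … F7 (the floor section), R1 … R19 (residues,
  mappings, modes, the channel buffers, the two init_blocksize, the temp estimate, the final test, `return TRUE`) — program points
  SD.5 … SD.12 of INVARIANTS §5 — over the shared vocabulary of Vorbis/Spec/StartDecoderAt.lean (S4: `Ghost`, `Frame`, `AtF1`, `AtERR`,
  `AtRet`, `Done`, `Failed`, `start_decoder.spec`; S5: `Own`, `OwnAll`, `Since`, `HandOK`).

  THE FORM OF AN ASSERTION (StartDecoderAt.lean, NAMING): `At<seg> u₀ g [i] v := ∃ A …, Body<seg> u₀ g [i] A … v`; `i` = the counter of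
  the OUTER loop the segment belongs to (3966 floors, 4043 residues, 4095 mappings, 4143 modes, 4158 channels, 4189 estimate): the
  composition unit sees it (its measure is `bound − i`, with the bound a field `i_le` of the loop head's body). Every other loop
  (15 of them) lies INSIDE one segment: its invariant is the worker's (CONTRACTS gives it; the transients are the owners').

  WHAT A BODY IS MADE OF.
      frame : Frame u₀ g pc_<seg> A v        S4's common part (rip, rsp = R, the saved registers, the poisoned frame, `CodeOK`, …)
      hand  : g.Hand A                       `*f`, the input, the globals as live objects; the arena above the text
      mid   : Mid g k kc z Ac A v.mem        THE INVARIANT INSIDE A SECTION (below): the groups of SD.k, the frame constants of SD.kc,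
                                             the zero rest from `restFrom z`; the block-carrying groups over the ARENA's predicate
                                             `Ac.Blk` (`Own`), `Ac` = A GHOST SNAPSHOT of the arena: the arena at the section's start
      late  : Late g kc A9 A10 A v.mem       the same for SD.11 / SD.12 (all groups; `OwnAll`)
      registers and spill slots               `rbp = f` (except R6: r13), the loop counter, the element under construction
      the transient of the section            the owners' `…UpTo` predicates, over `Since Ac A.1` (blocks allocated SINCE the snapshot)

  THE AGES OF THE BLOCKS (why there are ghost snapshots `A5 A6 A6c Ai Ak A7 A7c A9 A10`). A store into a block under construction
  (the floor element, record `i` of `residue_config`, `residue_books`, `classdata`, a row, a mapping record, `chan`, a channel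
  buffer) must keep every block the invariant READS. Two blocks of the arena are the same block or disjoint (`arena_disjoint`), so
  what is needed is that they are DIFFERENT blocks — known only at the allocation (`setup_malloc`'s block is no block of the arena
  before the call). The assertions keep that knowledge: what was finished before a snapshot `As` is stated over `As.Blk`, what
  was allocated after it over `Since As A.1`; a block of `Since As _` is never a block of `As`.
      floor section     A5 (SD.5): groups over A5.Blk · the floor block over Since A5 A.1
      residue section   A6 (SD.6) · A6c (after `residue_config`): R2 over Since A6 A6c · Ai (head of iteration i): finished records over
                        Since A6c Ai · record i's `residue_books` / `classdata` over Since Ai A.1 (R7: Since Ai Ak / Since Ak A.1)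
      mapping section   A7 (SD.7) · A7c (after `mapping`) · Ai: finished `chan` blocks over Since A7c Ai · `chan` of record i over Since Ai A.1
      channel loop      A9 (SD.9): buffers over Since A9 A.1 · after it A10: M6 / FY1 over Since A9 A10, the MDCT tables over Since A10 A.1
  At a section boundary (R1, R13, R14) the record is "committed" to the current arena (`Own.mono`, the groups' `reblk`).

  WHY `Mid` AND NOT `Real.SD`.  `Real.SD len k` is true at the BOUNDARY of two sections only: its clause `rest` says that every field
  of `*f` from `restFrom k` on is still zero, and the first store of section k+1 (`f->floor_count = …`) makes it false, while the
  group of section k+1 is not there yet. `Mid g k kc z` = the clauses of `SD k` with the rest weakened to `restFrom z` and the frame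
  constants taken at `kc` (Z10 dies inside the mapping section, Z24 inside the estimate loop).

  PROVED HERE (pure logic, for the workers of the 27 segments and of the composition):
      Mid.of_sd5                 the hand-over: `BodyF1.sd`, `BodyF1.own` ⊢ `Mid g 5 5 5 A.1 A mem`
      Mid.frame                  FRAME of `Mid` over a callee / a batch of stores that leaves `Mid.wins` of `*f`, the arena's blocks, the spill
                                 slots `[R+8, R+2CH)` and the shadow alone (every reader call, `error`, memset of a new block, a store into a
                                 block); `Own.frame` the same for the record alone
      Own.store_young, Own.footprint_young   THE PAYOFF OF THE SNAPSHOTS: a store (a callee's footprint) inside a block allocated since `Ac` keeps `Own k Ac.Blk`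
      Mid.grow, Own.mono         after an allocation: the ghost arena grew (`A.1.Extends A'.1`); the record over the larger predicate
      Mid.up                     `Ac.Blk B → g.Blk A B`
      Mid.failed (+ h2_null h3_null h5_null h2_done h3_done h5_done failed_late), H1 … H5.mono, ResidueDeinitOK.h2 / .h3,
      MappingDeinitOK.h5         an error exit: SD.ERR (`Failed`) from `Mid` and the transient of the running section
      Late.done                  the success exit: `Late`, T1, `FinalTest` ⊢ `Done` (full `VorbisOK` over `g.Blk A`, the record)
  and in Vorbis/Spec/StartDecoderAt.lean: `Done.separated` (SEP from the record), `Done.config_arena` ("every owned block is an arena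
  block"), `Done.reads_arena / buf_arena / reads_ne_obj / buf_ne_obj`, `OwnAll.config / reads / buf`, `HandOK.mono`.
  Smoke tests: Vorbis/Spec/StartDecoderBTest.lean, StartDecoderBTest2.lean.
-/
import Vorbis.Spec.StartDecoderAt
namespace Vorbis.Spec
open X86 X86.User Asan

namespace StartDecoder

/-! ### The invariant inside a section -/

/-- **The decoder invariant INSIDE a section of start_decoder** (between SD.k and SD.k+1), for the current ghost arena / object
list `A` and the "configuration arena" `Ac` — a ghost snapshot: the arena when the running section started (`A5`, `A6`, `A7`, `A9`;
at a boundary the current `A.1`), so that the blocks the section allocates are NOT blocks of `Ac` —: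
the clauses of `Real.SD len k`, except that
* the block-carrying groups are stated over `Ac.Blk` (`own`; the `g.Blk A` instances follow: `runBlk_setup`),
* the frame constants are those of point `kc` (`k ≤ kc`: Z10 is overwritten in the mapping section, Z24 in the estimate loop),
* the zero rest starts at `restFrom z` (`k ≤ z`: the running section has assigned the fields before it). -/
structure Mid (g : Ghost) (k kc z : Nat) (Ac : Arena) (A : Arena × List Obj) (mem : Mem) : Prop where
  /-- the shadow covers the live set; the block predicate is lawful; every allocated block is live -/
  env : Env (g.Blk A) (g.Live A) mem
  /-- ONE20, Z10 (kc ≤ 7), Z24 (kc ≤ 11), the shadow index of the frame -/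
  consts : SDFrameConsts kc mem g.R
  /-- AR1 – AR6 -/
  arena : ArenaOK A.1 A.2 mem g.f
  /-- no temp block is outstanding (hence `T = L`) -/
  noTemps : A.1.temps = []
  /-- the configuration arena is the current one, or a snapshot of it -/
  extc : Ac.Extends A.1
  /-- `Bits f` (S1 – S3, N1 – N2, V1, OB1) -/
  bits : Bits (g.Blk A) g.len mem g.f
  first : stb_vorbis.first_decode mem g.f = 1
  discard0 : stb_vorbis.discard_samples_deferred mem g.f = 0
  /-- HD1 – HD3 -/
  header : HeaderOK mem g.f
  /-- CM, CB0, the codebooks, FL (6 ≤ k), R (7 ≤ k), MP (8 ≤ k): over the blocks of `Ac` -/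
  own : Own k Ac.Blk mem g.f
  /-- the slot of `longest_floorlist` -/
  lfl : 6 ≤ k → k ≤ 9 → LongestFloorlist mem g.f g.R
  /-- MD1 – MD2 -/
  mode : 9 ≤ k → ModeOK mem g.f
  /-- `H0rest`: what the sections not yet run will assign is still zero -/
  rest : RestZero mem g.f (restFrom z)

/-- **The decoder invariant at SD.11 / SD.12** (after the two init_blocksize): every group; the block-carrying ones with the record
of WHEN their blocks were allocated (`OwnAll`: the configuration before the snapshot `A9`, the sample buffers between `A9` and
`A10`, the MDCT tables after `A10`). `kc = 11`: with Z24; `kc = 12`: without (the estimate loop counts in that slot). -/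
structure Late (g : Ghost) (kc : Nat) (A9 A10 : Arena) (A : Arena × List Obj) (mem : Mem) : Prop where
  env : Env (g.Blk A) (g.Live A) mem
  consts : SDFrameConsts kc mem g.R
  arena : ArenaOK A.1 A.2 mem g.f
  noTemps : A.1.temps = []
  bits : Bits (g.Blk A) g.len mem g.f
  first : stb_vorbis.first_decode mem g.f = 1
  discard0 : stb_vorbis.discard_samples_deferred mem g.f = 0
  header : HeaderOK mem g.f
  /-- CM … MP over `A9.Blk`; M6, FY1 over `Since A9 A10`; M2 – M4 over `Since A10 A.1` -/
  own : OwnAll A9 A10 A.1 mem g.f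
  mode : ModeOK mem g.f
  /-- M7: `previous_length = 0` (line 4156) -/
  m7 : stb_vorbis.previous_length mem g.f = 0

/-! ### Small vocabulary of the bodies -/

/-- The dword in the spill slot `[R + off]` of start_decoder's frame, unsigned. -/
def slot (g : Ghost) (mem : Mem) (off : Nat) : Nat := mem.u32 (g.R + off)

/-- `g(i) = floor_config + 1596·i`, the floor element under construction. -/
def floorAt (g : Ghost) (mem : Mem) (i : Nat) : Nat := stb_vorbis.floor_config_at mem g.f i

/-- `r(i) = residue_config + 32·i`, the residue record under construction. -/
def resAt (g : Ghost) (mem : Mem) (i : Nat) : Nat := stb_vorbis.residue_config_at mem g.f i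

/-- `m(i) = mapping + 56·i`, the mapping record under construction. -/
def mapAt (g : Ghost) (mem : Mem) (i : Nat) : Nat := stb_vorbis.mapping_at mem g.f i

/-- **The slot of `longest_floorlist` inside the floor loop** (`dword [R + 28H]`, CONTRACTS loop 0x11526a:
`= max(0, max_{i' < i} values(i'))`): at least `values` of every finished floor, in `[0, 250]`, and at least 2 once a floor is
finished (`values ≥ 2`: FL8). At `i = floor_count ≥ 1` it is `LongestFloorlist` of SD.6. -/
structure LflUpTo (g : Ghost) (mem : Mem) (i : Nat) : Prop where
  ge : LongestOK mem g.f i (mem.i32 (g.R + 0x28))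
  lo : 0 ≤ mem.i32 (g.R + 0x28)
  hi : mem.i32 (g.R + 0x28) ≤ 250
  two : 1 ≤ i → 2 ≤ mem.i32 (g.R + 0x28)

/-! ### The floor section (CONTRACTS 113, segments F1 … F7; stb_vorbis_fixed.c 3963 – 4036; loop 3966)

F1's entry is the hand-over `AtF1` (StartDecoderAt.lean). From F1's stores on (`floor_count`, `floor_config`) the point is
`Mid g 5 5 6`: the groups of SD.5, the zero rest from `residue_count` on. -/

/-- **The invariant of loop 3966** (`for (i = 0; i < f->floor_count; ++i)`), common to F2 … F7 (CONTRACTS, loop 0x11526a: "FRAME ∧ FL1 ∧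
FL2 ∧ 0 ≤ i = dword [rsp+0x18] ≤ floor_count ∧ ∀ i' < i: FL3(i') ∧ FL4(i') – FL10(i') ∧ dword [rsp+0x28] = max(0, max_{i'<i}
values(i')) ∧ Bits f"). GHOST `A5` = the arena at SD.5 (before `floor_config` was allocated): the groups of SD.5 are stated over ITS
blocks (`Mid … A5 A`), the floor block is a block of the arena allocated SINCE (`FloorsUpTo (Since A5 A.1)`) — so a store into the
floor element under construction keeps every block the groups read (`arena_disjoint`: it is a different block). Dead: rbx
r12 – r15, `[R+30H]`, `[R+38H]`, `low`, `hi`, the contents of `p`. Measure: `floor_count − i` (`i_le`; `floor_count ≤ 64` is `floors.FL1`). -/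
structure FloorLoop (u₀ : State) (g : Ghost) (pc : Word) (i : Nat) (A5 : Arena) (A : Arena × List Obj) (v : State) : Prop where
  frame : Frame u₀ g pc A v
  hand : g.Hand A
  /-- SD.5's groups over the blocks of `A5`; `floor_count`, `floor_types[]`, `floor_config` assigned; zero from `residue_count` on -/
  mid : Mid g 5 5 6 A5 A v.mem
  /-- rbp = f -/
  rbp : v.reg .rbp = addr g.f
  /-- dword `[R + 18H]` = i (the upper half of the old qword spill of `f` is stale and never read) -/
  cnt : slot g v.mem 0x18 = i
  i_le : (i : Int) ≤ stb_vorbis.floor_count v.mem g.f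
  /-- FL1, FL2 (a block of the arena allocated since `A5`), and FL3 – FL10 of the floors below `i` -/
  floors : FloorsUpTo (Since A5 A.1) v.mem g.f i
  /-- dword `[R + 28H]` = longest_floorlist so far -/
  lfl : LflUpTo g v.mem i

/-- **F2: the head of loop 3966** (0x11526a; from F1 with `i = 0`, from F7 with `i + 1`). -/
def BodyF2 (u₀ : State) (g : Ghost) (i : Nat) (A5 : Arena) (A : Arena × List Obj) (v : State) : Prop :=
  FloorLoop u₀ g pc_F2 i A5 A v

/-- `AtF2 u₀ g i v`: the entry assertion of segment `start_decoder.F2`. -/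
def AtF2 (u₀ : State) (g : Ghost) (i : Nat) (v : State) : Prop := ∃ A5 A, BodyF2 u₀ g i A5 A v

/-- **F3: a floor of type 0** (0x11532b; from F2 with `floor_types[i] = 0`): the loop invariant with `i < floor_count` — the six
fields and the book list are parsed into the element `g(i)` (inside the block of FL2), then `error(f, VORBIS_feature_not_supported)`:
the only exit is the epilogue (CONTRACTS F3: "Dead: every other register and slot"). -/
structure BodyF3 (u₀ : State) (g : Ghost) (i : Nat) (A5 : Arena) (A : Arena × List Obj) (v : State) : Prop where
  loop : FloorLoop u₀ g pc_F3 i A5 A v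
  lt : (i : Int) < stb_vorbis.floor_count v.mem g.f

/-- `AtF3 u₀ g i v`: the entry assertion of segment `start_decoder.F3`. -/
def AtF3 (u₀ : State) (g : Ghost) (i : Nat) (v : State) : Prop := ∃ A5 A, BodyF3 u₀ g i A5 A v

/-- **The floor `i` under construction after loop 3985** (the entry of F4): FL3(i), FL4(i), and the transient of the
partition-class loop at its exit: every class in use is `≤ 15` and `≤ max_class = mc`, `−1 ≤ mc ≤ 15`. -/
structure Floor4 (g : Ghost) (mem : Mem) (i : Nat) (mc : Int) : Prop where
  lt : (i : Int) < stb_vorbis.floor_count mem g.f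
  /-- FL3(i): `floor_types[i] = 1` -/
  FL3 : stb_vorbis.floor_types mem g.f i = 1
  /-- FL4(i): `partitions ≤ 31` (a `get_bits(f, 5)`) -/
  FL4 : Floor1.partitions mem (floorAt g mem i) ≤ 31
  mc_lo : -1 ≤ mc
  mc_hi : mc ≤ 15
  /-- FL5(i) and `pcl[j] ≤ max_class` for every partition -/
  pcl : PclUpTo mem (floorAt g mem i) (Floor1.partitions mem (floorAt g mem i)) mc

/-- **F4: the class loop 3990** (0x115494; from F2 0x115462): `rbx = g(i)`, `r13d = max_class`; FL3(i), FL4(i), FL5(i).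
Dead: r12 r14 r15, `[R+30H]`, `[R+38H]`. -/
structure BodyF4 (u₀ : State) (g : Ghost) (i : Nat) (A5 : Arena) (A : Arena × List Obj) (mc : Int) (v : State) :
    Prop where
  loop : FloorLoop u₀ g pc_F4 i A5 A v
  /-- rbx = g = floor_config + 1596·i -/
  rbx : v.reg .rbx = addr (floorAt g v.mem i)
  /-- r13d = max_class (−1 when there is no partition) -/
  r13 : v.reg .r13 = word32 mc
  cur : Floor4 g v.mem i mc

/-- `AtF4 u₀ g i v`: the entry assertion of segment `start_decoder.F4`. -/
def AtF4 (u₀ : State) (g : Ghost) (i : Nat) (v : State) : Prop := ∃ A5 A mc, BodyF4 u₀ g i A5 A mc v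

/-- **The floor `i` after the class loop** (the entry of F5): + FL6 for every class `≤ max_class` (`ClassesUpTo … n`, `mc < n`:
with `Floor4.pcl`, `ClassesUpTo.FL6` gives FL6(i)). `mc` = the final `max_class`, `n` = the class loop's counter at its exit. -/
structure Floor5 (g : Ghost) (mem : Mem) (i : Nat) (mc : Int) (n : Nat) : Prop where
  base : Floor4 g mem i mc
  classes : ClassesUpTo mem (floorAt g mem i) (stb_vorbis.codebook_count mem g.f) n
  mc_lt : mc < (n : Int)

/-- **F5: multiplier, rangebits, Xlist, values** (0x1155c7; from F4 0x11549c): `rbx = g(i)`; FL3(i) – FL6(i). Dead: r12 – r15,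
`[R+30H]`, `[R+38H]`. -/
structure BodyF5 (u₀ : State) (g : Ghost) (i : Nat) (A5 : Arena) (A : Arena × List Obj) (mc : Int) (n : Nat)
    (v : State) : Prop where
  loop : FloorLoop u₀ g pc_F5 i A5 A v
  rbx : v.reg .rbx = addr (floorAt g v.mem i)
  cur : Floor5 g v.mem i mc n

/-- `AtF5 u₀ g i v`: the entry assertion of segment `start_decoder.F5`. -/
def AtF5 (u₀ : State) (g : Ghost) (i : Nat) (v : State) : Prop := ∃ A5 A mc n, BodyF5 u₀ g i A5 A mc n v

/-- **The floor `i` after loops 4007 / 4009** (the entry of F6): + FL7(i), FL8(i) (so `2 ≤ values ≤ 250`: `values_le_250`), XL. -/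
structure Floor6 (g : Ghost) (mem : Mem) (i : Nat) (mc : Int) (n : Nat) : Prop where
  base : Floor5 g mem i mc n
  /-- FL7(i): `1 ≤ floor1_multiplier ≤ 4` -/
  FL7 : 1 ≤ Floor1.floor1_multiplier mem (floorAt g mem i) ∧ Floor1.floor1_multiplier mem (floorAt g mem i) ≤ 4
  /-- FL8(i): `values = 2 + Σ_{j < partitions} class_dimensions[pcl[j]]` -/
  FL8 : Floor1.values mem (floorAt g mem i)
    = 2 + (Floor1.dimSum mem (floorAt g mem i) (Floor1.partitions mem (floorAt g mem i)) : Int)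
  /-- XL: `Xlist[0] = 0`, `Xlist[1] = 2^rangebits`, `rangebits ≤ 15`, the later entries below `2^rangebits` -/
  xl : XL mem (floorAt g mem i)

/-- **F6: fill `p[]`, qsort, the duplicate test, sorted_order** (0x115714; from F5 0x1156f4): `rbx = g(i)`; FL3(i) – FL8(i), XL. The stack
array `p` (250 records of 4 bytes at `[R + 120H]`: the object `p` of the protected frame, accessible by `frame.shadow`) has no
content yet. Dead: r12 – r15, `[R+30H]`, `[R+38H]`. -/
structure BodyF6 (u₀ : State) (g : Ghost) (i : Nat) (A5 : Arena) (A : Arena × List Obj) (mc : Int) (n : Nat)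
    (v : State) : Prop where
  loop : FloorLoop u₀ g pc_F6 i A5 A v
  rbx : v.reg .rbx = addr (floorAt g v.mem i)
  cur : Floor6 g v.mem i mc n

/-- `AtF6 u₀ g i v`: the entry assertion of segment `start_decoder.F6`. -/
def AtF6 (u₀ : State) (g : Ghost) (i : Nat) (v : State) : Prop := ∃ A5 A mc n, BodyF6 u₀ g i A5 A mc n v

/-- **F7: the neighbors loop, longest_floorlist, `++i`** (0x115842; from F6 0x11580c): `rbx = g(i)`; FL3(i) – FL9(i) (FL9 as the exit of
loop 4023: `SortedUpTo … values`), XL. `low` / `hi` are the 4-byte objects `[R + 80H]`, `[R + 90H]` of the protected frame. Dead: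
r12 – r15 (r13d still holds `values`, not used). -/
structure BodyF7 (u₀ : State) (g : Ghost) (i : Nat) (A5 : Arena) (A : Arena × List Obj) (mc : Int) (n : Nat)
    (v : State) : Prop where
  loop : FloorLoop u₀ g pc_F7 i A5 A v
  rbx : v.reg .rbx = addr (floorAt g v.mem i)
  cur : Floor6 g v.mem i mc n
  /-- FL9(i): every `sorted_order[q]`, `q < values`, is below `values` -/
  sorted : SortedUpTo v.mem (floorAt g v.mem i) (Floor1.values v.mem (floorAt g v.mem i)).toNat

/-- `AtF7 u₀ g i v`: the entry assertion of segment `start_decoder.F7`. -/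
def AtF7 (u₀ : State) (g : Ghost) (i : Nat) (v : State) : Prop := ∃ A5 A mc n, BodyF7 u₀ g i A5 A mc n v

/-! ### The residue section (segments R1 … R7; stb_vorbis_fixed.c 4039 – 4087; loop 4043) -/

/-- **R1: SD.6** (0x1158f8; from the exit of the floor loop, F2 0x115280): the groups of SD.6 (FL1 – FL10 over the arena's blocks,
`LongestFloorlist`), everything from `residue_count` on still zero; `rbp = f`; no other register carries a value. -/
structure BodyR1 (u₀ : State) (g : Ghost) (A : Arena × List Obj) (v : State) : Prop where
  frame : Frame u₀ g pc_R1 A v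
  hand : g.Hand A
  mid : Mid g 6 6 6 A.1 A v.mem
  rbp : v.reg .rbp = addr g.f

/-- `AtR1 u₀ g v`: the entry assertion of segment `start_decoder.R1`. -/
def AtR1 (u₀ : State) (g : Ghost) (v : State) : Prop := ∃ A, BodyR1 u₀ g A v

/-- **RES(i) WITH THE AGES OF ITS BLOCKS**: `ResidueUpTo` (R1, R2, and R3 – R8b of the records below `i`) where the block of R2
(`residue_config`) was allocated between the snapshots `A6` (the arena at SD.6) and `A6c` (right after that allocation), and the
blocks of the finished records (`residue_books`, `classdata`, the rows) between `A6c` and `Ai` (the arena at the head of iteration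
`i`). So: a store into record `i` of `residue_config` keeps the finished records' blocks and every older block; a store into a
block allocated after `Ai` keeps all of these (`arena_disjoint`). `ResTrans.upTo`: it implies `ResidueUpTo A.Blk`. -/
structure ResTrans (A6 A6c Ai A : Arena) (mem : Mem) (f i : Nat) : Prop where
  ext6 : A6.Extends A6c
  ext6c : A6c.Extends Ai
  exti : Ai.Extends A
  /-- the counter is at most `residue_count` -/
  n_le : (i : Int) ≤ stb_vorbis.residue_count mem f
  /-- R1 -/
  R1 : 1 ≤ stb_vorbis.residue_count mem f ∧ stb_vorbis.residue_count mem f ≤ 64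
  /-- R2: allocated since `A6`, a block of `A6c` -/
  R2 : Since A6 A6c ⟨stb_vorbis.residue_config mem f, Off.sizeof.Residue * (stb_vorbis.residue_count mem f).toNat⟩
  /-- R3 for the records below the counter -/
  R3 : ∀ i' : Nat, i' < i → stb_vorbis.residue_types mem f i' ≤ 2
  /-- R4 – R8b for the records below the counter; their blocks allocated since `A6c`, blocks of `Ai` -/
  record : ∀ i' : Nat, i' < i → ResidueAtOK (Since A6c Ai) mem f (stb_vorbis.residue_config_at mem f i')

/-- One residue record over a larger block predicate. -/
theorem ResidueAtOK.mono {Blk Blk' : Block → Prop} {mem : Mem} {f r : Nat} (h : ResidueAtOK Blk mem f r)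
    (hB : ∀ B, Blk B → Blk' B) : ResidueAtOK Blk' mem f r :=
  ⟨h.R4, h.R5, h.R6, h.R7, h.R7b, hB _ h.R8, h.R8c, hB _ h.R8a, fun q hq => hB _ (h.R8a_row q hq), h.R8b⟩

/-- **RES(i) over the arena's block predicate**: the owners' transient (`ResidueUpTo.deinit`, `.succ`, `.toOK` …). -/
theorem ResTrans.upTo {A6 A6c Ai A : Arena} {mem : Mem} {f i : Nat} (h : ResTrans A6 A6c Ai A mem f i) :
    ResidueUpTo A.Blk mem f i :=
  ⟨h.n_le, h.R1, (h.R2.1.mono h.ext6c).mono h.exti, h.R3,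
    fun i' hi' => ResidueAtOK.mono (h.record i' hi') (fun _ hB => hB.1.mono h.exti)⟩

/-- **The invariant of loop 4043** (`for (i = 0; i < f->residue_count; ++i)`), common to R2 … R7 (CONTRACTS, loop 0x115982: "FR ∧ G ∧
r14d = i ∧ 0 ≤ i ≤ rc ∧ RES(i) ∧ mapping = 0"): SD.6's groups over the blocks of the snapshot `A6` (the arena at SD.6),
`residue_count` / `residue_types[]` / `residue_config` assigned, zero from `mapping_count` on (so `mapping = NULL`: H5);
RES(i) = `ResTrans` (with the ages of its blocks) ∧ `ResidueZeroFrom` (`classdata = NULL` in the records from `zfrom` on: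
`zfrom = i` up to the store of `classdata` in R6, `i + 1` after it). `Ai` = the arena at the head of iteration `i` (at R2 … R4:
the current one). Where `i` lives (r14d, or `[R+38H]` / `[R+40H]`) is said by each body. -/
structure ResLoop (u₀ : State) (g : Ghost) (pc : Word) (i zfrom : Nat) (A6 A6c Ai : Arena) (A : Arena × List Obj) (v : State) :
    Prop where
  frame : Frame u₀ g pc A v
  hand : g.Hand A
  mid : Mid g 6 6 7 A6 A v.mem
  i_le : (i : Int) ≤ stb_vorbis.residue_count v.mem g.f
  res : ResTrans A6 A6c Ai A.1 v.mem g.f i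
  zero : ResidueZeroFrom v.mem g.f zfrom

/-- **R2: the head of loop 4043** (0x115982; from R1 with `i = 0`, from R7 with `i + 1`): `rbp = f`, `r14d = i`. -/
structure BodyR2 (u₀ : State) (g : Ghost) (i : Nat) (A6 A6c : Arena) (A : Arena × List Obj) (v : State) : Prop where
  loop : ResLoop u₀ g pc_R2 i i A6 A6c A.1 A v
  rbp : v.reg .rbp = addr g.f
  r14 : v.reg .r14 = addr i

/-- `AtR2 u₀ g i v`: the entry assertion of segment `start_decoder.R2`. -/
def AtR2 (u₀ : State) (g : Ghost) (i : Nat) (v : State) : Prop := ∃ A6 A6c A, BodyR2 u₀ g i A6 A6c A v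

/-- **R3: the fields of record `i`** (0x1159f8; from R2 with `i < residue_count`): `rbp = f`, `r14d = i`; record `i` still has
`classdata = NULL` (`loop.zero`; the memset of line 4042 zeroed the whole record, which no clause needs). -/
structure BodyR3 (u₀ : State) (g : Ghost) (i : Nat) (A6 A6c : Arena) (A : Arena × List Obj) (v : State) : Prop where
  loop : ResLoop u₀ g pc_R3 i i A6 A6c A.1 A v
  rbp : v.reg .rbp = addr g.f
  r14 : v.reg .r14 = addr i
  lt : (i : Int) < stb_vorbis.residue_count v.mem g.f

/-- `AtR3 u₀ g i v`: the entry assertion of segment `start_decoder.R3`. -/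
def AtR3 (u₀ : State) (g : Ghost) (i : Nat) (v : State) : Prop := ∃ A6 A6c A, BodyR3 u₀ g i A6 A6c A v

/-- **The residue record `i` under construction**, `r = residue_config + 32·i`, by stage: `4` (entry of R4: the six fields parsed
and tested: R3(i), R4 – R7), `5` (entry of R5: + R8, `residue_books` a block of the arena), `6` (entry of R6: + R8c), `7` (entry
of R7: + R8a first half, `classdata` a block of the arena). `Pk` / `Pd`: the block predicates of `residue_books` / `classdata`
(`Since Ai A.1` — allocated in this iteration, after everything else the loop's invariant reads; at R7: `Since Ai Ak` /
`Since Ak A.1`, `classdata` is the younger). With `RowsUpTo … E` (R7's loop) `ResidueAtOK.assemble` gives the record. -/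
structure ResCur (g : Ghost) (Pk Pd : Block → Prop) (mem : Mem) (i stage : Nat) : Prop where
  lt : (i : Int) < stb_vorbis.residue_count mem g.f
  /-- R3(i): `residue_types[i] ≤ 2` -/
  R3 : stb_vorbis.residue_types mem g.f i ≤ 2
  /-- R4: `begin ≤ end < 2^24` -/
  R4 : Residue.begin mem (resAt g mem i) ≤ Residue.end_ mem (resAt g mem i) ∧ Residue.end_ mem (resAt g mem i) < 2 ^ 24
  /-- R5: `1 ≤ part_size ≤ 2^24` -/
  R5 : 1 ≤ Residue.part_size mem (resAt g mem i) ∧ Residue.part_size mem (resAt g mem i) ≤ 2 ^ 24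
  /-- R6: `1 ≤ classifications ≤ 64` -/
  R6 : 1 ≤ Residue.classifications mem (resAt g mem i) ∧ Residue.classifications mem (resAt g mem i) ≤ 64
  /-- R7: `classbook < codebook_count` (stored BEFORE its test: it holds at every later error exit) -/
  R7 : (Residue.classbook mem (resAt g mem i) : Int) < stb_vorbis.codebook_count mem g.f
  /-- R8: `Block(residue_books, 16·classifications)` -/
  R8 : 5 ≤ stage → Pk ⟨Residue.residue_books mem (resAt g mem i), 16 * Residue.classifications mem (resAt g mem i)⟩
  /-- R8c: every one of the `8·classifications` slots holds −1 or a codebook number -/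
  R8c : 6 ≤ stage → ResBooksUpTo mem g.f (resAt g mem i) (Residue.classifications mem (resAt g mem i)) 0
  /-- R8a, first half: `Block(classdata, 8·E)` -/
  R8a : 7 ≤ stage → Pd ⟨Residue.classdata mem (resAt g mem i), 8 * Residue.E mem g.f (resAt g mem i)⟩

/-- **R4: residue_cascade, residue_books = setup_malloc(16·cls)** (0x115bdc, NOT the first address of the segment; from R3):
`rbx = r`, `r14d = i`, `rbp = f`; R3(i), R4 – R7 of record `i`; `classdata` of the record still NULL (`loop.zero`).
The contents of the frame object `residue_cascade` (64 bytes at `[R + C0H]`) are irrelevant for safety. -/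
structure BodyR4 (u₀ : State) (g : Ghost) (i : Nat) (A6 A6c : Arena) (A : Arena × List Obj) (v : State) : Prop where
  loop : ResLoop u₀ g pc_R4 i i A6 A6c A.1 A v
  rbp : v.reg .rbp = addr g.f
  r14 : v.reg .r14 = addr i
  rbx : v.reg .rbx = addr (resAt g v.mem i)
  cur : ResCur g A.1.Blk A.1.Blk v.mem i 4

/-- `AtR4 u₀ g i v`: the entry assertion of segment `start_decoder.R4`. -/
def AtR4 (u₀ : State) (g : Ghost) (i : Nat) (v : State) : Prop := ∃ A6 A6c A, BodyR4 u₀ g i A6 A6c A v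

/-- **R5: residue_books[j][k]** (0x115cef, NOT the first address; from R4): as R4 + R8 (`residue_books` a block of the arena of
`16·cls` bytes); `classdata` still NULL. -/
structure BodyR5 (u₀ : State) (g : Ghost) (i : Nat) (A6 A6c Ai : Arena) (A : Arena × List Obj) (v : State) : Prop where
  loop : ResLoop u₀ g pc_R5 i i A6 A6c Ai A v
  rbp : v.reg .rbp = addr g.f
  r14 : v.reg .r14 = addr i
  rbx : v.reg .rbx = addr (resAt g v.mem i)
  cur : ResCur g (Since Ai A.1) (Since Ai A.1) v.mem i 5

/-- `AtR5 u₀ g i v`: the entry assertion of segment `start_decoder.R5`. -/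
def AtR5 (u₀ : State) (g : Ghost) (i : Nat) (v : State) : Prop := ∃ A6 A6c Ai A, BodyR5 u₀ g i A6 A6c Ai A v

/-- **R6: classdata = setup_malloc(8·E), memset** (0x115cf9; from R5 0x115cdb): `r13 = f` (**rbp is scratch**: the first instruction
is `mov rbp, r13`), `rbx = r`, `r14d = i`; + R8c; `classdata` still NULL. -/
structure BodyR6 (u₀ : State) (g : Ghost) (i : Nat) (A6 A6c Ai : Arena) (A : Arena × List Obj) (v : State) : Prop where
  loop : ResLoop u₀ g pc_R6 i i A6 A6c Ai A v
  /-- f is in r13 here, not in rbp -/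
  r13 : v.reg .r13 = addr g.f
  r14 : v.reg .r14 = addr i
  rbx : v.reg .rbx = addr (resAt g v.mem i)
  cur : ResCur g (Since Ai A.1) (Since Ai A.1) v.mem i 6

/-- `AtR6 u₀ g i v`: the entry assertion of segment `start_decoder.R6`. -/
def AtR6 (u₀ : State) (g : Ghost) (i : Nat) (v : State) : Prop := ∃ A6 A6c Ai A, BodyR6 u₀ g i A6 A6c Ai A v

/-- **R7: the rows `classdata[j]`, then `++i`** (0x115db9; from R6 with `j = 0`; the back edge of loop 4079 is inside the segment):
`rbp = f`, `rbx = r`, `r13d = j = 0`, dword `[R + 38H]` = i; + R8a first half (`classdata` a block of the arena of `8·E` bytes, so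
only the records from `i + 1` on have `classdata = NULL`). The loop's invariant is `RowsUpTo A.1.Blk … j` (j = 0: `RowsUpTo.zero`). -/
structure BodyR7 (u₀ : State) (g : Ghost) (i : Nat) (A6 A6c Ai Ak : Arena) (A : Arena × List Obj) (v : State) : Prop where
  loop : ResLoop u₀ g pc_R7 i (i + 1) A6 A6c Ai A v
  /-- `Ak` = the arena right before `classdata` was allocated (after `residue_books`) -/
  extk : Ai.Extends Ak
  extk' : Ak.Extends A.1
  rbp : v.reg .rbp = addr g.f
  rbx : v.reg .rbx = addr (resAt g v.mem i)
  /-- r13d = j = 0 -/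
  r13 : v.reg .r13 = addr 0
  /-- dword `[R + 38H]` = i -/
  cnt : slot g v.mem 0x38 = i
  cur : ResCur g (Since Ai Ak) (Since Ak A.1) v.mem i 7

/-- `AtR7 u₀ g i v`: the entry assertion of segment `start_decoder.R7`. -/
def AtR7 (u₀ : State) (g : Ghost) (i : Nat) (v : State) : Prop := ∃ A6 A6c Ai Ak A, BodyR7 u₀ g i A6 A6c Ai Ak A v

/-! ### The mapping section (segments R8 … R12; stb_vorbis_fixed.c 4091 – 4138; loop 4095) -/

/-- **MAPS(i) WITH THE AGES OF ITS BLOCKS**: `MappingUpTo` (MP1, and MP2 – MP6 of the records below `i`) where the mapping table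
was allocated between the snapshots `A7` (the arena at SD.7) and `A7c` (right after that allocation), and the `chan` blocks of the
finished records between `A7c` and `Ai` (the arena at the head of iteration `i`). `MapTrans.upTo`: it implies `MappingUpTo A.Blk`. -/
structure MapTrans (A7 A7c Ai A : Arena) (mem : Mem) (f i : Nat) : Prop where
  ext7 : A7.Extends A7c
  ext7c : A7c.Extends Ai
  exti : Ai.Extends A
  /-- the counter is at most `mapping_count` -/
  n_le : (i : Int) ≤ stb_vorbis.mapping_count mem f
  /-- MP1 -/
  MP1 : 1 ≤ stb_vorbis.mapping_count mem f ∧ stb_vorbis.mapping_count mem f ≤ 64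
  /-- MP1, the block: allocated since `A7`, a block of `A7c` -/
  MP1_block : Since A7 A7c ⟨stb_vorbis.mapping mem f, Off.sizeof.Mapping * (stb_vorbis.mapping_count mem f).toNat⟩
  /-- MP2 – MP6 for the records below the counter; their `chan` blocks allocated since `A7c`, blocks of `Ai` -/
  record : ∀ i' : Nat, i' < i → MappingAtOK (Since A7c Ai) mem f (stb_vorbis.mapping_at mem f i')

/-- One mapping record over a larger block predicate. -/
theorem MappingAtOK.mono {Blk Blk' : Block → Prop} {mem : Mem} {f m : Nat} (h : MappingAtOK Blk mem f m)
    (hB : ∀ B, Blk B → Blk' B) : MappingAtOK Blk' mem f m :=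
  ⟨hB _ h.MP2, h.MP3, h.MP4_steps, h.MP4, h.MP5, h.MP6⟩

/-- **MAPS(i) over the arena's block predicate**: the owners' transient (`MappingUpTo.deinit`, `.succ`, `.toOK`). -/
theorem MapTrans.upTo {A7 A7c Ai A : Arena} {mem : Mem} {f i : Nat} (h : MapTrans A7 A7c Ai A mem f i) :
    MappingUpTo A.Blk mem f i :=
  ⟨h.n_le, h.MP1, (h.MP1_block.1.mono h.ext7c).mono h.exti,
    fun i' hi' => MappingAtOK.mono (h.record i' hi') (fun _ hB => hB.1.mono h.exti)⟩

/-- **The invariant of loop 4095** (`for (i = 0; i < f->mapping_count; ++i)`), common to R8 … R12 (CONTRACTS, loop 0x115f22: "FR ∧ G ∧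
RALL ∧ mem32[rsp+0x10] = i ∧ 0 ≤ i ≤ mc ∧ MAPS(i)"): SD.7's groups (R1 – R8b …) over the blocks of the snapshot `A7` (the arena at
SD.7), `mapping_count` / `mapping` assigned, zero from `mode_count` on; the frame constants WITHOUT Z10 (`kc = 8`: the slot
`[R + 10H]` is the loop's counter now); MAPS(i) = `MapTrans` (with the ages of its blocks); `rbp = f`. `Ai` = the arena at the head
of iteration `i` (at R8, R9: the current one). r15d / r14d (max_submaps) carry no constraint. -/
structure MapLoop (u₀ : State) (g : Ghost) (pc : Word) (i : Nat) (A7 A7c Ai : Arena) (A : Arena × List Obj) (v : State) : Prop where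
  frame : Frame u₀ g pc A v
  hand : g.Hand A
  mid : Mid g 7 8 8 A7 A v.mem
  rbp : v.reg .rbp = addr g.f
  /-- dword `[R + 10H]` = i -/
  cnt : slot g v.mem 0x10 = i
  i_le : (i : Int) ≤ stb_vorbis.mapping_count v.mem g.f
  maps : MapTrans A7 A7c Ai A.1 v.mem g.f i

/-- **R8: the head of loop 4095** (0x115f22; from R2 with `i = 0`, from R12 with `i + 1`). -/
def BodyR8 (u₀ : State) (g : Ghost) (i : Nat) (A7 A7c : Arena) (A : Arena × List Obj) (v : State) : Prop :=
  MapLoop u₀ g pc_R8 i A7 A7c A.1 A v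

/-- `AtR8 u₀ g i v`: the entry assertion of segment `start_decoder.R8`. -/
def AtR8 (u₀ : State) (g : Ghost) (i : Nat) (v : State) : Prop := ∃ A7 A7c A, BodyR8 u₀ g i A7 A7c A v

/-- **R9: mapping_type, chan, submaps, coupling_steps** (0x116105; from R8 with `i < mapping_count`). The record `m(i)` is all zero
(the memset of line 4094; no check site and no clause of DeinitOK needs it). -/
structure BodyR9 (u₀ : State) (g : Ghost) (i : Nat) (A7 A7c : Arena) (A : Arena × List Obj) (v : State) : Prop where
  loop : MapLoop u₀ g pc_R9 i A7 A7c A.1 A v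
  lt : (i : Int) < stb_vorbis.mapping_count v.mem g.f

/-- `AtR9 u₀ g i v`: the entry assertion of segment `start_decoder.R9`. -/
def AtR9 (u₀ : State) (g : Ghost) (i : Nat) (v : State) : Prop := ∃ A7 A7c A, BodyR9 u₀ g i A7 A7c A v

/-- **The mapping record `i` under construction**, `m = mapping + 56·i`, by stage: `10` (entry of R10: MP2, MP3, `1 ≤ coupling_steps
≤ C`), `11` (entry of R11: + MP4: `coupling_steps ≤ C` — possibly 0 — and every step's magnitude / angle), `12` (entry of R12:
+ MP5). With MP6 (R12's loop) it is `MappingAtOK`. -/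
structure MapCur (g : Ghost) (Ab : Block → Prop) (mem : Mem) (i stage : Nat) : Prop where
  lt : (i : Int) < stb_vorbis.mapping_count mem g.f
  /-- MP2: `Block(chan, 3·C)` -/
  MP2 : Ab ⟨Mapping.chan mem (mapAt g mem i), Off.sizeof.MappingChannel * nchan mem g.f⟩
  /-- MP3: `1 ≤ submaps ≤ 16` -/
  MP3 : 1 ≤ Mapping.submaps mem (mapAt g mem i) ∧ Mapping.submaps mem (mapAt g mem i) ≤ 16
  /-- MP4, first half: `coupling_steps ≤ C` (stored, then tested) -/
  MP4_steps : (Mapping.coupling_steps mem (mapAt g mem i) : Int) ≤ stb_vorbis.channels mem g.f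
  /-- the coupling loop is entered only with `1 ≤ coupling_steps` -/
  steps_pos : stage = 10 → 1 ≤ Mapping.coupling_steps mem (mapAt g mem i)
  /-- MP4: every coupling step: magnitude, angle < C, magnitude ≠ angle -/
  MP4 : 11 ≤ stage → ∀ k : Nat, k < Mapping.coupling_steps mem (mapAt g mem i) → Mapping.CouplingOK mem g.f (mapAt g mem i) k
  /-- MP5: `chan[j].mux < submaps` for every channel -/
  MP5 : 12 ≤ stage → ∀ j : Nat, (j : Int) < stb_vorbis.channels mem g.f → Mapping.MuxOK mem (mapAt g mem i) j

/-- **R10: the coupling loop 4110** (0x116380; from R9 with `1 ≤ coupling_steps ≤ C`): `rbx = m(i)`; MP2, MP3. -/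
structure BodyR10 (u₀ : State) (g : Ghost) (i : Nat) (A7 A7c Ai : Arena) (A : Arena × List Obj) (v : State) : Prop where
  loop : MapLoop u₀ g pc_R10 i A7 A7c Ai A v
  rbx : v.reg .rbx = addr (mapAt g v.mem i)
  cur : MapCur g (Since Ai A.1) v.mem i 10

/-- `AtR10 u₀ g i v`: the entry assertion of segment `start_decoder.R10`. -/
def AtR10 (u₀ : State) (g : Ghost) (i : Nat) (v : State) : Prop := ∃ A7 A7c Ai A, BodyR10 u₀ g i A7 A7c Ai A v

/-- **R11: the reserved bits, `mux[j]`** (0x11635d; from R9 with `coupling_steps = 0`, from R10): `rbx = m(i)`; MP2 – MP4. -/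
structure BodyR11 (u₀ : State) (g : Ghost) (i : Nat) (A7 A7c Ai : Arena) (A : Arena × List Obj) (v : State) : Prop where
  loop : MapLoop u₀ g pc_R11 i A7 A7c Ai A v
  rbx : v.reg .rbx = addr (mapAt g v.mem i)
  cur : MapCur g (Since Ai A.1) v.mem i 11

/-- `AtR11 u₀ g i v`: the entry assertion of segment `start_decoder.R11`. -/
def AtR11 (u₀ : State) (g : Ghost) (i : Nat) (v : State) : Prop := ∃ A7 A7c Ai A, BodyR11 u₀ g i A7 A7c Ai A v

/-- **R12: the submap loop 4132, then `++i`** (0x116545, NOT the first address; from R11 with `j = 0`; the back edge is inside the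
segment): `rbx = m(i)`, `r13d = j = 0`; MP2 – MP5. -/
structure BodyR12 (u₀ : State) (g : Ghost) (i : Nat) (A7 A7c Ai : Arena) (A : Arena × List Obj) (v : State) : Prop where
  loop : MapLoop u₀ g pc_R12 i A7 A7c Ai A v
  rbx : v.reg .rbx = addr (mapAt g v.mem i)
  /-- r13d = j = 0 -/
  r13 : v.reg .r13 = addr 0
  cur : MapCur g (Since Ai A.1) v.mem i 12

/-- `AtR12 u₀ g i v`: the entry assertion of segment `start_decoder.R12`. -/
def AtR12 (u₀ : State) (g : Ghost) (i : Nat) (v : State) : Prop := ∃ A7 A7c Ai A, BodyR12 u₀ g i A7 A7c Ai A v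

/-! ### The mode section (segments R13, R14; stb_vorbis_fixed.c 4142 – 4156; loop 4143) -/

/-- **The invariant of loop 4143** (`for (i = 0; i < f->mode_count; ++i)`), common to R13, R14 (CONTRACTS, loop 0x115f67: "FR ∧ G ∧
RALL ∧ MALL ∧ MD1 ∧ r14d = i ∧ 0 ≤ i ≤ mode_count ∧ ∀ i' < i: MD2 for mode i'"): SD.8's groups (MP1 – MP6 over the arena's blocks),
`mode_count` assigned, zero from `total_samples` on; `ModeUpTo`; `rbp = f`, `r14d = i`. -/
structure ModeLoop (u₀ : State) (g : Ghost) (pc : Word) (i : Nat) (A : Arena × List Obj) (v : State) : Prop where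
  frame : Frame u₀ g pc A v
  hand : g.Hand A
  mid : Mid g 8 8 9 A.1 A v.mem
  rbp : v.reg .rbp = addr g.f
  r14 : v.reg .r14 = addr i
  i_le : (i : Int) ≤ stb_vorbis.mode_count v.mem g.f
  modes : ModeUpTo v.mem g.f i

/-- **R13: the head of loop 4143** (0x115f67; from R8 with `i = 0`, from R14 with `i + 1`). -/
def BodyR13 (u₀ : State) (g : Ghost) (i : Nat) (A : Arena × List Obj) (v : State) : Prop := ModeLoop u₀ g pc_R13 i A v

/-- `AtR13 u₀ g i v`: the entry assertion of segment `start_decoder.R13`. -/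
def AtR13 (u₀ : State) (g : Ghost) (i : Nat) (v : State) : Prop := ∃ A, BodyR13 u₀ g i A v

/-- **R14: one mode record** (0x11655f; from R13 with `i < mode_count`). -/
structure BodyR14 (u₀ : State) (g : Ghost) (i : Nat) (A : Arena × List Obj) (v : State) : Prop where
  loop : ModeLoop u₀ g pc_R14 i A v
  lt : (i : Int) < stb_vorbis.mode_count v.mem g.f

/-- `AtR14 u₀ g i v`: the entry assertion of segment `start_decoder.R14`. -/
def AtR14 (u₀ : State) (g : Ghost) (i : Nat) (v : State) : Prop := ∃ A, BodyR14 u₀ g i A v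

/-! ### The channel loop and the two init_blocksize (segments R15, R16; stb_vorbis_fixed.c 4158 – 4173, 4186 – 4188; loop 4158) -/

/-- **The invariant of loop 4158** (`for (i = 0; i < f->channels; ++i)`), common to R15, R16 (CONTRACTS, loop 0x115f97: "FR ∧ G ∧ RALL
∧ MALL ∧ MD1 – MD2 ∧ M7 (= 0) ∧ r14d = i ∧ 0 ≤ i ≤ C ∧ CH(i)"): SD.9's groups — the block-carrying ones over the blocks of the
SNAPSHOT `A9` = the arena at the first arrival (`Mid … A9 A`: `A9.Extends A.1`) —, `previous_length = 0`, zero from `A[]` on;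
CH(i) = `ChanUpTo` ∧ `FYUpTo` over `Since A9 A.1`: the buffers of the channels below `i` are blocks of the arena allocated AFTER
the snapshot (⇒ none of them is a block the configuration reads); the size of `finalY[c]` is `2·longest_floorlist`,
`longest_floorlist` = dword `[R + 28H]` (`mid.lfl`: ≥ every floor's `values`). `rbp = f`, `r14d = i`. -/
structure ChanLoop (u₀ : State) (g : Ghost) (pc : Word) (i : Nat) (A9 : Arena) (A : Arena × List Obj) (v : State) : Prop where
  frame : Frame u₀ g pc A v
  hand : g.Hand A
  mid : Mid g 9 9 10 A9 A v.mem
  rbp : v.reg .rbp = addr g.f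
  r14 : v.reg .r14 = addr i
  i_le : (i : Int) ≤ stb_vorbis.channels v.mem g.f
  /-- M7: `previous_length = 0` (line 4156) -/
  prev0 : stb_vorbis.previous_length v.mem g.f = 0
  /-- M6 below `i` -/
  chan : Mdct.ChanUpTo (Since A9 A.1) v.mem g.f i
  /-- FY1 below `i`: blocks of `2·longest_floorlist` bytes -/
  fy : FYUpTo (Since A9 A.1) v.mem g.f (v.mem.i32 (g.R + 0x28)) i

/-- **R15: the head of loop 4158** (0x115f97; from R13 with `i = 0` and `A9 = A.1`, from R16 with `i + 1`). -/
def BodyR15 (u₀ : State) (g : Ghost) (i : Nat) (A9 : Arena) (A : Arena × List Obj) (v : State) : Prop :=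
  ChanLoop u₀ g pc_R15 i A9 A v

/-- `AtR15 u₀ g i v`: the entry assertion of segment `start_decoder.R15`. -/
def AtR15 (u₀ : State) (g : Ghost) (i : Nat) (v : State) : Prop := ∃ A9 A, BodyR15 u₀ g i A9 A v

/-- **R16: the three buffers of channel `i`** (0x11665c; from R15 with `i < channels`). -/
structure BodyR16 (u₀ : State) (g : Ghost) (i : Nat) (A9 : Arena) (A : Arena × List Obj) (v : State) : Prop where
  loop : ChanLoop u₀ g pc_R16 i A9 A v
  lt : (i : Int) < stb_vorbis.channels v.mem g.f

/-- `AtR16 u₀ g i v`: the entry assertion of segment `start_decoder.R16`. -/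
def AtR16 (u₀ : State) (g : Ghost) (i : Nat) (v : State) : Prop := ∃ A9 A, BodyR16 u₀ g i A9 A v

/-! ### The temp estimate, the final test, `return TRUE` (segments R17, R18, R19; stb_vorbis_fixed.c 4189 – 4232; loop 4189) -/

/-- **The invariant of loop 4189** (`for (i = 0; i < f->residue_count; ++i)`), common to R17, R18 (CONTRACTS, loop 0x116059:
"mem32[rsp+0x24] = i ∧ 0 ≤ i ≤ rc ∧ mem32[rsp+0x10] = P_i := max(0, max_{i' < i} PR(r(i'), A_i')) ∧ 0 ≤ P_i ≤ 8192 ∧ r15d = b1 ∧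
r13 = 2·b1 (64-bit)"): every group of SD.11 (`Late … 12`: the frame constants WITHOUT Z24 — the slot `[R + 24H]` is the counter);
`P_i = maxPartRead mem f i` (`maxPartRead_le`: `≤ b1 ≤ 8192`). `rbp = f`. -/
structure EstLoop (u₀ : State) (g : Ghost) (pc : Word) (i : Nat) (A9 A10 : Arena) (A : Arena × List Obj) (v : State) : Prop where
  frame : Frame u₀ g pc A v
  hand : g.Hand A
  late : Late g 12 A9 A10 A v.mem
  rbp : v.reg .rbp = addr g.f
  /-- dword `[R + 24H]` = i -/
  cnt : slot g v.mem 0x24 = i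
  i_le : (i : Int) ≤ stb_vorbis.residue_count v.mem g.f
  /-- dword `[R + 10H]` = max_part_read so far -/
  est : slot g v.mem 0x10 = maxPartRead v.mem g.f i
  /-- r15d = blocksize_1 -/
  r15 : v.reg .r15 = addr (bsize v.mem g.f 1)
  /-- r13 = 2·blocksize_1 (`(sext(b1) << 2) >> 1`, 64 bits) -/
  r13 : v.reg .r13 = addr (2 * bsize v.mem g.f 1)

/-- **R17: the head of loop 4189; after it T1 and the final test** (0x116059; from R15 with `i = 0`, from R18 with `i + 1`). -/
def BodyR17 (u₀ : State) (g : Ghost) (i : Nat) (A9 A10 : Arena) (A : Arena × List Obj) (v : State) : Prop :=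
  EstLoop u₀ g pc_R17 i A9 A10 A v

/-- `AtR17 u₀ g i v`: the entry assertion of segment `start_decoder.R17`. -/
def AtR17 (u₀ : State) (g : Ghost) (i : Nat) (v : State) : Prop := ∃ A9 A10 A, BodyR17 u₀ g i A9 A10 A v

/-- **R18: one residue of the estimate** (0x116784; from R17 with `i < residue_count`). -/
structure BodyR18 (u₀ : State) (g : Ghost) (i : Nat) (A9 A10 : Arena) (A : Arena × List Obj) (v : State) : Prop where
  loop : EstLoop u₀ g pc_R18 i A9 A10 A v
  lt : (i : Int) < stb_vorbis.residue_count v.mem g.f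

/-- `AtR18 u₀ g i v`: the entry assertion of segment `start_decoder.R18`. -/
def AtR18 (u₀ : State) (g : Ghost) (i : Nat) (v : State) : Prop := ∃ A9 A10 A, BodyR18 u₀ g i A9 A10 A v

/-- **R19: first_audio_page_offset, `return TRUE`** (0x11682e; from R17): every group of SD.11, T1 (`temp_memory_required =
max(8·C·(P+1), 2·b1)`, FIX 9), the final test of ARENA-FIX 1 (`S + 1808 + tmr + 64 ≤ T = L`); `rbp = f`. Both arms end with
`mov eax, [rsp+20H]` (= 1: ONE20 of `late.consts`) `; jmp 113b22`: the exit is `AtERR` with eax = 1 and `Done`. -/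
structure BodyR19 (u₀ : State) (g : Ghost) (A9 A10 : Arena) (A : Arena × List Obj) (v : State) : Prop where
  frame : Frame u₀ g pc_R19 A v
  hand : g.Hand A
  late : Late g 12 A9 A10 A v.mem
  rbp : v.reg .rbp = addr g.f
  /-- T1 -/
  temp : T1 v.mem g.f
  /-- `S + 1808 + tmr + 64 ≤ T`, `T = L` -/
  final : FinalTest v.mem g.f

/-- `AtR19 u₀ g v`: the entry assertion of segment `start_decoder.R19`. -/
def AtR19 (u₀ : State) (g : Ghost) (v : State) : Prop := ∃ A9 A10 A, BodyR19 u₀ g A9 A10 A v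

/-! ### Bridges (pure logic; no machine state): the hand-over, the error exits -/

/-- A block of the configuration arena is an allocated block of the run's predicate: `Ac.Blk B → g.Blk A B` (AR7 + `runBlk_setup`).
The `hB` of every `X.reblk` that turns a clause of `Own` into the instance `Real.SD` / `DeinitOK` ask for. -/
theorem Mid.up {g : Ghost} {k kc z : Nat} {Ac : Arena} {A : Arena × List Obj} {mem : Mem} (h : Mid g k kc z Ac A mem) (B : Block)
    (hB : Ac.Blk B) : g.Blk A B :=
  runBlk_setup (hB.mono h.extc)

/-- **THE HAND-OVER S4 → S5** (`BodyF1`, SD.5): `Real.SD len 5` and the record `Own 5 A.1.Blk` are the point `Mid g 5 5 5` from which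
segment F1 starts. -/
theorem Mid.of_sd5 {g : Ghost} {A : Arena × List Obj} {mem : Mem}
    (h : Real.SD g.len 5 A (g.Blk A) (g.Live A) mem g.f g.R) (ho : Own 5 A.1.Blk mem g.f) : Mid g 5 5 5 A.1 A mem :=
  { env := h.env
    consts := h.frame
    arena := h.arena
    noTemps := h.noTemps
    extc := Arena.Extends.refl _
    bits := h.bits
    first := h.first
    discard0 := h.discard0
    header := h.header (by omega)
    own := ho
    lfl := fun h6 => absurd h6 (by omega)
    mode := fun h9 => absurd h9 (by omega)
    rest := h.rest }

/-- H1 over another block predicate. -/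
theorem H1.mono {Blk Blk' : Block → Prop} {mem : Mem} {f : Nat} (h : H1 Blk mem f) (hB : ∀ B, Blk B → Blk' B) : H1 Blk' mem f := by
  cases h with
  | inl h0 => exact Or.inl h0
  | inr h1 => exact Or.inr (hB _ h1)

/-- H2 over another block predicate. -/
theorem H2.mono {Blk Blk' : Block → Prop} {mem : Mem} {f : Nat} (h : H2 Blk mem f) (hB : ∀ B, Blk B → Blk' B) : H2 Blk' mem f := by
  cases h with
  | inl h0 => exact Or.inl h0
  | inr h1 => exact Or.inr ⟨h1.1, hB _ h1.2⟩

/-- H3 over another block predicate. -/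
theorem H3.mono {Blk Blk' : Block → Prop} {mem : Mem} {f : Nat} (h : H3 Blk mem f) (hB : ∀ B, Blk B → Blk' B) : H3 Blk' mem f := by
  intro hne i hi hcd
  obtain ⟨h1, h2, h3⟩ := h hne i hi hcd
  exact ⟨h1, h2, hB _ h3⟩

/-- H4 over another block predicate. -/
theorem H4.mono {Blk Blk' : Block → Prop} {mem : Mem} {f : Nat} (h : H4 Blk mem f) (hB : ∀ B, Blk B → Blk' B) : H4 Blk' mem f := by
  cases h with
  | inl h0 => exact Or.inl h0
  | inr h1 => exact Or.inr ⟨h1.1, hB _ h1.2⟩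

/-- H5 over another block predicate. -/
theorem H5.mono {Blk Blk' : Block → Prop} {mem : Mem} {f : Nat} (h : H5 Blk mem f) (hB : ∀ B, Blk B → Blk' B) : H5 Blk' mem f := by
  cases h with
  | inl h0 => exact Or.inl h0
  | inr h1 => exact Or.inr ⟨h1.1, hB _ h1.2⟩

/-- **R9 in the deinit form gives H2** (with R1's upper bound): what an error exit of the residue section has from
`ResidueUpTo.deinit` (Vorbis/ResidueMapping/ResidueFrame.lean). -/
theorem ResidueDeinitOK.h2 {Blk : Block → Prop} {mem : Mem} {f : Nat} (h : ResidueDeinitOK Blk mem f)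
    (h64 : stb_vorbis.residue_count mem f ≤ 64) : H2 Blk mem f := by
  cases h with
  | inl h0 => exact Or.inl h0
  | inr h1 =>
    have hb := h1.1
    simp only [voff] at hb
    exact Or.inr ⟨h64, hb⟩

/-- **R9 in the deinit form gives H3.** -/
theorem ResidueDeinitOK.h3 {Blk : Block → Prop} {mem : Mem} {f : Nat} (h : ResidueDeinitOK Blk mem f) : H3 Blk mem f := by
  intro hne i hi hcd
  cases h with
  | inl h0 => exact absurd h0 hne
  | inr h1 =>
    cases h1.2 i hi with
    | inl hz => exact absurd hz hcd
    | inr hr => exact ⟨hr.2.1, hr.1, hr.2.2⟩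

/-- **H5 from the deinit form of MP1** (`MappingUpTo.deinit`), with MP1's upper bound. -/
theorem MappingDeinitOK.h5 {Blk : Block → Prop} {mem : Mem} {f : Nat} (h : MappingDeinitOK Blk mem f)
    (h64 : stb_vorbis.mapping_count mem f ≤ 64) : H5 Blk mem f := by
  cases h with
  | inl h0 => exact Or.inl h0
  | inr h1 => exact Or.inr ⟨h64, h1⟩

/-- **AN ERROR EXIT FROM INSIDE A SECTION** (`call error ; jmp 113b22` with eax = 0; `error` stores `f->error` only, the point is
carried over it by the groups' frame lemmas): SD.ERR (`Failed`). H1, H4 come from the record `own` (CM2, CB0 over the arena's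
blocks); H2, H3, H5 are the caller's: from the zero rest while the residue / mapping section has not started (`Mid.h2_null`,
`h3_null`, `h5_null`), from the transient of the running section (`ResidueUpTo.deinit` + `ResidueDeinitOK.h2 / h3`,
`MappingUpTo.deinit` + `MappingDeinitOK.h5`), from the finished group after it (`Mid.h2_done` …). -/
theorem Mid.failed {g : Ghost} {k kc z : Nat} {Ac : Arena} {A : Arena × List Obj} {mem : Mem} (h : Mid g k kc z Ac A mem)
    (hk : 5 ≤ k) (h2 : H2 (g.Blk A) mem g.f) (h3 : H3 (g.Blk A) mem g.f) (h5 : H5 (g.Blk A) mem g.f) :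
    Failed g.len g.f (g.Live A) A mem := by
  have h1 : H1 (g.Blk A) mem g.f := H1.mono (CommentsOK.h1 (h.own.comment (by omega))) h.up
  have h4 : H4 (g.Blk A) mem g.f := H4.mono (CB0.h4 (h.own.cb0 (by omega))) h.up
  refine ⟨⟨h.env, ⟨Bits.ob1 h.bits, ArenaOK.alloc_buffer_ne_zero h.arena, h1, h2, h3, h4, h5⟩, h.bits⟩, h.arena.AR1, ?_⟩
  intro o ho
  apply h.arena.AR6 o
  unfold Arena.objs
  exact List.mem_append_left _ ho

/-- H2 while `residue_config` is still NULL (the floor section: `z ≤ 6`). -/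
theorem Mid.h2_null {g : Ghost} {k kc z : Nat} {Ac : Arena} {A : Arena × List Obj} {mem : Mem} (h : Mid g k kc z Ac A mem)
    (hz : z ≤ 6) (Blk : Block → Prop) : H2 Blk mem g.f :=
  H2.of_null (h.rest.residue_null (restFrom_le_residue hz)).1

/-- H3 while `residue_config` is still NULL. -/
theorem Mid.h3_null {g : Ghost} {k kc z : Nat} {Ac : Arena} {A : Arena × List Obj} {mem : Mem} (h : Mid g k kc z Ac A mem)
    (hz : z ≤ 6) (Blk : Block → Prop) : H3 Blk mem g.f :=
  H3.of_null (h.rest.residue_null (restFrom_le_residue hz)).1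

/-- H5 while `mapping` is still NULL (the floor and the residue sections: `z ≤ 7`). -/
theorem Mid.h5_null {g : Ghost} {k kc z : Nat} {Ac : Arena} {A : Arena × List Obj} {mem : Mem} (h : Mid g k kc z Ac A mem)
    (hz : z ≤ 7) (Blk : Block → Prop) : H5 Blk mem g.f :=
  H5.of_null (h.rest.mapping_null (restFrom_le_mapping hz))

/-- H2 once the residue group is there (`7 ≤ k`). -/
theorem Mid.h2_done {g : Ghost} {k kc z : Nat} {Ac : Arena} {A : Arena × List Obj} {mem : Mem} (h : Mid g k kc z Ac A mem)
    (hk : 7 ≤ k) : H2 (g.Blk A) mem g.f :=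
  H2.mono (ResidueOK.h2 (h.own.residue hk)) h.up

/-- H3 once the residue group is there (`7 ≤ k`). -/
theorem Mid.h3_done {g : Ghost} {k kc z : Nat} {Ac : Arena} {A : Arena × List Obj} {mem : Mem} (h : Mid g k kc z Ac A mem)
    (hk : 7 ≤ k) : H3 (g.Blk A) mem g.f :=
  H3.mono (ResidueOK.h3 (h.own.residue hk) (h.own.nonnull (by omega))) h.up

/-- H5 once the mapping group is there (`8 ≤ k`). -/
theorem Mid.h5_done {g : Ghost} {k kc z : Nat} {Ac : Arena} {A : Arena × List Obj} {mem : Mem} (h : Mid g k kc z Ac A mem)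
    (hk : 8 ≤ k) : H5 (g.Blk A) mem g.f :=
  H5.mono (MappingOK.h5 (h.own.mapping hk)) h.up

/-- **An error exit of the mode section, the channel loop, the two init_blocksize** (`8 ≤ k`): every H-clause is a finished group. -/
theorem Mid.failed_late {g : Ghost} {k kc z : Nat} {Ac : Arena} {A : Arena × List Obj} {mem : Mem} (h : Mid g k kc z Ac A mem)
    (hk : 8 ≤ k) : Failed g.len g.f (g.Live A) A mem :=
  h.failed (by omega) (h.h2_done (by omega)) (h.h3_done (by omega)) (h.h5_done hk)

/-! ### FRAME of the point inside a section (what a worker applies after every callee and every batch of stores)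

The windows are INDEXED BY THE POINT: inside section k+1 the segment's own stores go to the fields of that section
(`[restFrom k, restFrom (k+1))`: `floor_count … floor_config` in the floor section, …), which neither the groups of SD.k read nor
the zero rest from `restFrom (k+1)` on contains — so the SAME lemma carries the point over the callees and over the segment's own
stores into `*f`. -/

/-- The end of the fields of `*f` that the groups of SD.k read: `codebooks` (k ≤ 5), `floor_config` (6), `residue_config` (7),
`mapping` (8), `mode_config[64]` (k ≥ 9). -/
def Mid.hi (k : Nat) : Nat :=
  if k ≤ 5 then 176 else if k = 6 then 320 else if k = 7 then 464 else if k = 8 then 480 else 868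

theorem Mid.hi_ge (k : Nat) : 176 ≤ Mid.hi k := by
  unfold Mid.hi
  split
  · omega
  · split
    · omega
    · split
      · omega
      · split
        · omega
        · omega

theorem Mid.hi_ge6 {k : Nat} (h : 6 ≤ k) : 320 ≤ Mid.hi k := by
  unfold Mid.hi
  split
  · omega
  · split
    · omega
    · split
      · omega
      · split
        · omega
        · omega

theorem Mid.hi_ge7 {k : Nat} (h : 7 ≤ k) : 464 ≤ Mid.hi k := by
  unfold Mid.hi
  split
  · omega
  · split
    · omega
    · split
      · omega
      · split
        · omega
        · omega

theorem Mid.hi_ge8 {k : Nat} (h : 8 ≤ k) : 480 ≤ Mid.hi k := by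
  unfold Mid.hi
  split
  · omega
  · split
    · omega
    · split
      · omega
      · split
        · omega
        · omega

theorem Mid.hi_ge9 {k : Nat} (h : 9 ≤ k) : 868 ≤ Mid.hi k := by
  unfold Mid.hi
  split
  · omega
  · split
    · omega
    · split
      · omega
      · split
        · omega
        · omega

/-- **The windows of `*f` the record `Own k` reads**: `channels` (MP2's size); `vendor` … `comment_list`; `codebook_count` … the last
field of the groups of SD.k. -/
def Own.winsAt (k : Nat) : Wins := [(4, 8), (24, 48), (160, Mid.hi k)]

/-- A field of `*f` between `codebook_count` and the end of SD.k's fields lies in `Own.winsAt k`. -/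
theorem Own.inWins (k off n : Nat) (h1 : 160 ≤ off) (h2 : off + n ≤ Mid.hi k) : InWins (Own.winsAt k) off n :=
  ⟨(160, Mid.hi k), List.mem_cons_of_mem _ (List.mem_cons_of_mem _ List.mem_cons_self), h1, h2⟩

/-- A list of windows each of which lies in `[4, 8)`, `[24, 48)` or `[160, hi k)` is covered by `Own.winsAt k`. -/
theorem Own.winsSub (k : Nat) {ws : Wins}
    (h : ∀ w, w ∈ ws → (4 ≤ w.1 ∧ w.2 ≤ 8) ∨ (24 ≤ w.1 ∧ w.2 ≤ 48) ∨ (160 ≤ w.1 ∧ w.2 ≤ Mid.hi k)) :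
    WinsSub ws (Own.winsAt k) := by
  intro w hw
  rcases h w hw with h1 | h2 | h3
  · exact ⟨(4, 8), List.mem_cons_self, h1.1, h1.2⟩
  · exact ⟨(24, 48), List.mem_cons_of_mem _ List.mem_cons_self, h2.1, h2.2⟩
  · exact ⟨(160, Mid.hi k), List.mem_cons_of_mem _ (List.mem_cons_of_mem _ List.mem_cons_self), h3.1, h3.2⟩

/-- **FRAME of the record `Own k Ab`**: the windows `Own.winsAt k` of `*f` read the same, and every block of `Ab` is kept (the
stores went to other fields of `*f`, the stack, a block allocated later). Same address, same predicate. -/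
theorem Own.frame {k : Nat} {Ab : Block → Prop} {mem mem' : Mem} {f : Nat} (h : Own k Ab mem f)
    (he : ObjEq (Own.winsAt k) mem f mem' f) (hk : ∀ B, Ab B → B.Kept mem mem') : Own k Ab mem' f := by
  have hge := Mid.hi_ge k
  have ecbs : stb_vorbis.codebooks mem' f = stb_vorbis.codebooks mem f := by
    simp only [vacc, voff]
    exact he.u64 168 (Own.inWins k 168 8 (by omega) (by omega))
  have ecnt : stb_vorbis.codebook_count mem' f = stb_vorbis.codebook_count mem f := by
    simp only [vacc, voff]
    exact he.i32 160 (Own.inWins k 160 4 (by omega) (by omega))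
  refine ⟨?_, ?_, ?_, ?_, ?_, ?_, ?_⟩
  · intro h2
    have hc := h.comment h2
    refine hc.transfer (he.sub (Own.winsSub k ?_)) (fun B hR => hk B (hc.reads_blk hR)) (fun _ _ hb => hb)
    intro w hw
    simp only [CommentsOK.wins, List.mem_cons, List.mem_nil_iff, or_false] at hw
    subst hw
    simp only []
    omega
  · intro h3
    refine (h.cb0 h3).transfer (he.sub (Own.winsSub k ?_)) (fun _ _ hb => hb)
    intro w hw
    simp only [CB0.wins, List.mem_cons, List.mem_nil_iff, or_false] at hw
    subst hw
    simp only []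
    omega
  · intro h3
    rw [ecbs]
    exact h.nonnull h3
  · intro h5 i hi
    rw [ecnt] at hi
    have hcb := (h.cb0 (by omega)).ok (h.nonnull (by omega))
    have hcbk := hk _ hcb.F2
    have e : stb_vorbis.codebooks_at mem' f i = stb_vorbis.codebooks_at mem f i := by
      simp only [stb_vorbis.codebooks_at]
      rw [ecbs]
    rw [e]
    have hb := h.books h5 i hi
    apply hb.transfer
    · exact hcb.cb_kept hcbk i hi
    · intro hse
      exact hk _ (hb.K4.sv hse)
    · intro _ _ hblk
      exact hblk
  · intro h6
    have hfl := h.floor h6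
    have hb6 := Mid.hi_ge6 h6
    refine hfl.transfer (he.sub (Own.winsSub k ?_)) (fun B hR => hk B (hfl.reads_blk hR)) (fun _ _ hb => hb)
    intro w hw
    simp only [FloorsOK.wins, List.mem_cons, List.mem_nil_iff, or_false] at hw
    subst hw
    simp only []
    omega
  · intro h7
    have hr := h.residue h7
    have hb7 := Mid.hi_ge7 h7
    have hcb := (h.cb0 (by omega)).ok (h.nonnull (by omega))
    refine hr.transfer (he.sub (Own.winsSub k ?_)) (fun B hR => hk B (hr.reads_blk hcb.F2 hR)) (fun _ _ hb => hb)
    intro w hw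
    simp only [ResidueOK.wins, List.mem_cons, List.mem_nil_iff, or_false] at hw
    rcases hw with rfl | rfl
    · simp only []
      omega
    · simp only []
      omega
  · intro h8
    have hm := h.mapping h8
    have hb8 := Mid.hi_ge8 h8
    refine hm.transfer (he.sub (Own.winsSub k ?_)) (fun B hR => hk B (hm.reads_blk hR)) (fun _ _ hb => hb)
    intro w hw
    simp only [MappingOK.wins, List.mem_cons, List.mem_nil_iff, or_false] at hw
    rcases hw with rfl | rfl | rfl | rfl
    · simp only []
      omega
    · simp only []
      omega
    · simp only []
      omega
    · simp only []
      omega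

/-- The fields of `*f` that the groups of SD.k read end inside `*f`. -/
theorem Mid.hi_le (k : Nat) : Mid.hi k ≤ 868 := by
  unfold Mid.hi
  split
  · omega
  · split
    · omega
    · split
      · omega
      · split
        · omega
        · omega

/-- **THE PAYOFF OF THE SNAPSHOT `Ac`** (THE AGES OF THE BLOCKS; Vorbis/Arena.lean §9): a store INSIDE A BLOCK UNDER CONSTRUCTION — any
block `C` allocated since the configuration arena `Ac` (the floor block, `residue_config`, `residue_books`, `classdata`, a row, the
mapping table, `chan`, a channel buffer), the `n` bytes at `b` inside it — keeps the record `Own k Ac.Blk`: every block the record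
reads is a block of `Ac`, hence a DIFFERENT block. `ha`: the arena layer of the moment; `hout`, `hf`: `*f` (a stack object) lies
outside the arena's buffer (`HandOK.objOut`) and does not wrap. Over assertions that state everything over the current `A.1.Blk`
this was not provable. -/
theorem Own.store_young {k : Nat} {Ac A : Arena} {others : List Obj} {mem : Mem} {f : Nat} (h : Own k Ac.Blk mem f)
    (ha : ArenaOK A others mem f) (he : Ac.Extends A) (hout : f + Off.sizeof.stb_vorbis ≤ A.B ∨ A.B + A.L ≤ f)
    (hf : f + Off.sizeof.stb_vorbis ≤ 2 ^ 64) {C : Block} (hC : Since Ac A C) {b n : Nat} (x : Nat) (hin : C.contains b n) :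
    Own k Ac.Blk (mem.writeLE (addr b) n x) f := by
  apply h.frame
  · apply ha.objEq_of_store_blk hC.1 x hin hout hf
    intro w hw
    have hhi := Mid.hi_le k
    simp only [Own.winsAt, List.mem_cons, List.mem_nil_iff, or_false] at hw
    rcases hw with rfl | rfl | rfl
    · simp only [voff]
      omega
    · simp only [voff]
      omega
    · simp only [voff]
      omega
  · exact ha.allKept_of_store_since he hC x hin

/-- The same for a callee's footprint (the walker's `SameExcept` of a batch of stores) inside the block under construction: the
memset of a new block, `neighbors`' stores … `he'`: the windows of `*f` read the same (`ObjEq.of_sameExcept`). -/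
theorem Own.footprint_young {k : Nat} {Ac A : Arena} {others : List Obj} {mem mem' : Mem} {f : Nat} (h : Own k Ac.Blk mem f)
    (ha : ArenaOK A others mem f) (he : Ac.Extends A) (he' : ObjEq (Own.winsAt k) mem f mem' f) {C : Block} (hC : Since Ac A C)
    {ws : List Span} (hs : Mem.SameExcept ws mem mem') (hin : ∀ w, w ∈ ws → C.base ≤ w.lo ∧ w.hi ≤ C.base + C.size) :
    Own k Ac.Blk mem' f :=
  h.frame he' (ha.allKept_of_since he hC hs hin)

/-- **The windows of `*f` that `Mid g k kc z` reads BESIDES the arena's four fields and the bit reader's** (`Bits`: re-established from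
the callee's post): `sample_rate`, `channels`; `vendor` … `comment_list`; `blocksize_0` … the last field of SD.k's groups; the zero
rest from `restFrom z` to the paging fields; `first_decode`; `discard_samples_deferred`. A reader call (`Reader.wins…`), `error`
(`[140, 144)`), an allocator call (`[8, 12)`, `[128, 136)`) AND the stores of section k+1 into its own fields
(`[Mid.hi k, restFrom z)`) write none of them. -/
def Mid.winsAt (k z : Nat) : Wins :=
  [(0, 8), (24, 48), (152, Mid.hi k), (restFrom z, 1480), (1749, 1750), (1784, 1788)]

/-- **FRAME OF `Mid`** over a callee or a batch of stores that (a) leaves the windows `Mid.winsAt k z` of `*f` alone, (b) keeps every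
block of the CONFIGURATION arena `Ac` (the blocks under construction are younger: `Since Ac A.1`), (c) keeps the frame constants
(`hconsts`: `SDFrameConsts.frame` when `[R + 8, R + 28H)` is untouched, else slot by slot — the segments spill into `[R + 10H]`,
`[R + 18H]`, `[R + 24H]`) and the slot of `longest_floorlist` (`hslot`), and (d) leaves the shadow alone; the arena layer (`harena`: `ArenaOK.frame`, or the allocator's post) and `Bits` (`hbits`: the reader's post,
`Bits.frame_fields`) are given for the new memory. Same ghost arena: for an allocation use `Mid.grow` first. -/
theorem Mid.frame {g : Ghost} {k kc z : Nat} {Ac : Arena} {A : Arena × List Obj} {mem mem' : Mem} (h : Mid g k kc z Ac A mem)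
    (he : ObjEq (Mid.winsAt k z) mem g.f mem' g.f) (hk : ∀ B, Ac.Blk B → B.Kept mem mem')
    (hconsts : SDFrameConsts kc mem' g.R) (hslot : 6 ≤ k → k ≤ 9 → mem'.i32 (g.R + 0x28) = mem.i32 (g.R + 0x28))
    (hsh : Mem.EqOn 0xC00000 0xE00000 mem mem') (harena : ArenaOK A.1 A.2 mem' g.f)
    (hbits : Bits (g.Blk A) g.len mem' g.f) : Mid g k kc z Ac A mem' := by
  have hge := Mid.hi_ge k
  have m0 : ((0, 8) : Nat × Nat) ∈ Mid.winsAt k z := List.mem_cons_self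
  have m1 : ((24, 48) : Nat × Nat) ∈ Mid.winsAt k z := List.mem_cons_of_mem _ List.mem_cons_self
  have m2 : ((152, Mid.hi k) : Nat × Nat) ∈ Mid.winsAt k z :=
    List.mem_cons_of_mem _ (List.mem_cons_of_mem _ List.mem_cons_self)
  have m3 : ((restFrom z, 1480) : Nat × Nat) ∈ Mid.winsAt k z :=
    List.mem_cons_of_mem _ (List.mem_cons_of_mem _ (List.mem_cons_of_mem _ List.mem_cons_self))
  have m4 : ((1749, 1750) : Nat × Nat) ∈ Mid.winsAt k z :=
    List.mem_cons_of_mem _ (List.mem_cons_of_mem _ (List.mem_cons_of_mem _ (List.mem_cons_of_mem _ List.mem_cons_self)))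
  have m5 : ((1784, 1788) : Nat × Nat) ∈ Mid.winsAt k z :=
    List.mem_cons_of_mem _ (List.mem_cons_of_mem _ (List.mem_cons_of_mem _ (List.mem_cons_of_mem _
      (List.mem_cons_of_mem _ List.mem_cons_self))))
  have hkc : ∀ B, Ac.Blk B → B.Kept mem mem' := hk
  have heown : ObjEq (Own.winsAt k) mem g.f mem' g.f := by
    apply he.sub
    intro w hw
    simp only [Own.winsAt, List.mem_cons, List.mem_nil_iff, or_false] at hw
    rcases hw with rfl | rfl | rfl
    · exact ⟨(0, 8), m0, by simp only []; omega, by simp only []; omega⟩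
    · exact ⟨(24, 48), m1, Nat.le_refl _, Nat.le_refl _⟩
    · exact ⟨(152, Mid.hi k), m2, by simp only []; omega, Nat.le_refl _⟩
  have hown := h.own.frame heown hkc
  refine ⟨h.env.eqOn hsh, ?_, harena, h.noTemps, h.extc, hbits, ?_, ?_, ?_, hown, ?_, ?_, ?_⟩
  · exact hconsts
  · have e : stb_vorbis.first_decode mem' g.f = stb_vorbis.first_decode mem g.f := by
      simp only [vacc, voff]
      exact he.u8 1749 ⟨(1749, 1750), m4, Nat.le_refl _, Nat.le_refl _⟩
    rw [e]
    exact h.first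
  · have e : stb_vorbis.discard_samples_deferred mem' g.f = stb_vorbis.discard_samples_deferred mem g.f := by
      simp only [vacc, voff]
      exact he.i32 1784 ⟨(1784, 1788), m5, Nat.le_refl _, Nat.le_refl _⟩
    rw [e]
    exact h.discard0
  · apply h.header.transfer
    apply he.sub
    intro w hw
    simp only [HeaderOK.wins, List.mem_cons, List.mem_nil_iff, or_false] at hw
    rcases hw with rfl | rfl
    · exact ⟨(0, 8), m0, Nat.le_refl _, Nat.le_refl _⟩
    · exact ⟨(152, Mid.hi k), m2, Nat.le_refl _, by simp only []; omega⟩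
  · -- the slot of longest_floorlist and `values` of every floor
    intro h6 h9
    obtain ⟨h1, h2, h3⟩ := h.lfl h6 h9
    have hb6 := Mid.hi_ge6 h6
    have hfl := h.own.floor h6
    have eslot : mem'.i32 (g.R + 0x28) = mem.i32 (g.R + 0x28) := hslot h6 h9
    have ecount : stb_vorbis.floor_count mem' g.f = stb_vorbis.floor_count mem g.f := by
      simp only [vacc, voff]
      exact he.i32 176 ⟨(152, Mid.hi k), m2, by simp only []; omega, by simp only []; omega⟩
    have ecfg : stb_vorbis.floor_config mem' g.f = stb_vorbis.floor_config mem g.f := by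
      simp only [vacc, voff]
      exact he.u64 312 ⟨(152, Mid.hi k), m2, by simp only []; omega, by simp only []; omega⟩
    have hkept := hkc _ hfl.FL2
    refine ⟨by rw [eslot]; exact h1, by rw [eslot]; exact h2, ?_⟩
    intro i hi
    rw [ecount] at hi
    have eat : stb_vorbis.floor_config_at mem' g.f i = stb_vorbis.floor_config_at mem g.f i := by
      simp only [stb_vorbis.floor_config_at]
      rw [ecfg]
    have hcnt := hfl.FL1
    have ev : Floor1.values mem' (stb_vorbis.floor_config_at mem g.f i) = Floor1.values mem (stb_vorbis.floor_config_at mem g.f i) := by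
      simp only [Floor1.values, stb_vorbis.floor_config_at, voff]
      apply hkept.i32
      · simp only [floorBlock, voff]
        omega
      · simp only [floorBlock, voff]
        omega
    rw [eat, ev, eslot]
    exact h3 i hi
  · intro h9
    have hb9 := Mid.hi_ge9 h9
    apply (h.mode h9).transfer
    apply he.sub
    intro w hw
    simp only [ModeOK.wins, List.mem_cons, List.mem_nil_iff, or_false] at hw
    rcases hw with rfl | rfl
    · exact ⟨(152, Mid.hi k), m2, by simp only []; omega, by simp only []; omega⟩
    · exact ⟨(152, Mid.hi k), m2, by simp only []; omega, by simp only []; omega⟩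
  · -- the zero rest
    intro o ho1 ho2
    have hz := h.rest o ho1 ho2
    simp only [voff] at ho2
    rw [he (restFrom z, 1480) m3 o ho1 ho2]
    exact hz

/-- **`Mid` AFTER AN ALLOCATION** (`setup_malloc` returned a block: the ghost arena grew from `A` to `A'`, one more live object): only
the block predicate and the live set changed, the memory is the callee's return memory in both. The configuration arena `Ac`
stays (the record keeps the OLD predicate: that is the point of it); the caller re-instantiates it to `A'.1` when it wants the
new block in the record (`Own` is monotone in the predicate: the groups' `reblk`). -/
theorem Mid.grow {g : Ghost} {k kc z : Nat} {Ac : Arena} {A A' : Arena × List Obj} {mem : Mem} (h : Mid g k kc z Ac A mem)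
    (hext : A.1.Extends A'.1) (henv : Env (g.Blk A') (g.Live A') mem) (harena : ArenaOK A'.1 A'.2 mem g.f)
    (hno : A'.1.temps = []) (hbits : Bits (g.Blk A') g.len mem g.f) : Mid g k kc z Ac A' mem :=
  ⟨henv, h.consts, harena, hno, h.extc.trans hext, hbits, h.first, h.discard0, h.header, h.own, h.lfl, h.mode, h.rest⟩

/-- The record over a larger predicate (after `Mid.grow`: from the blocks of `Ac` to the blocks of the grown arena). -/
theorem Own.mono {k : Nat} {Ab Ab' : Block → Prop} {mem : Mem} {f : Nat} (h : Own k Ab mem f) (hB : ∀ B, Ab B → Ab' B) :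
    Own k Ab' mem f :=
  ⟨fun h2 => (h.comment h2).reblk (fun B _ hb => hB B hb), fun h3 => (h.cb0 h3).reblk (fun B _ hb => hB B hb), h.nonnull,
    fun h5 i hi => (h.books h5 i hi).reblk (fun B _ hb => hB B hb), fun h6 => (h.floor h6).reblk (fun B _ hb => hB B hb),
    fun h7 => (h.residue h7).reblk (fun B _ hb => hB B hb), fun h8 => (h.mapping h8).reblk (fun B _ hb => hB B hb)⟩

/-! ### SD.12: `Done` from the last point (`Done.separated`, `Done.config_arena` …: Vorbis/Spec/StartDecoderAt.lean) -/

/-- **SD.12 from the last point** (the exit of R19 → `AtERR` with eax = 1): every group of `Late`, T1 and the final test give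
`Done`: full `VorbisOK(&p)` over the run's block predicate, the arena layer, and the record. -/
theorem Late.done {g : Ghost} {kc : Nat} {A9 A10 : Arena} {A : Arena × List Obj} {mem : Mem} (h : Late g kc A9 A10 A mem)
    (ht : T1 mem g.f) (hf : FinalTest mem g.f) : Done g.len g.f (g.Live A) A mem := by
  have hc : ConfigOK (g.Blk A) mem g.f := h.own.config (fun B hB => runBlk_setup hB) h.header h.mode ht
  have hw : W1 mem g.f := W1.of_zero h.discard0 (HD3.hd3v h.header.HD3).le
  exact ⟨h.env, Real.VorbisOK.of_config hc h.bits (Mdct.M7Range.of_zero h.m7) hw, h.arena, h.noTemps, hf, h.first, ⟨A9, A10, h.own⟩⟩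

/-! ### The statements of the segments (`Seg<seg> Lay μ u₀`: S4's convention, Vorbis/Spec/StartDecoderA.lean)

A unit's STATEMENT (Vorbis/Spec/Units/start_decoder_<seg>.lean) is `Seg<seg> Lay μ u₀` under the shared hypotheses and the contracts
of the segment's callees; the composition unit has the 52 `Seg`s as hypotheses. -/

/-- **Segment `start_decoder.F1`** (`floor_count = get_bits(6) + 1`, `floor_config = setup_malloc(1596·floor_count)` (NULL → error), `longest_floorlist = 0`, `i = 0`). -/
def SegF1 (Lay : Layout) (μ : Microarch) (u₀ : State) : Prop :=
  ∀ (g : Ghost) (v : State), AtF1 u₀ g v → ReachVia Lay μ WayInv v (fun w => AtF2 u₀ g 0 w ∨ AtERR u₀ g w)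

/-- **Segment `start_decoder.F2`** (the head of loop 3966: `i < floor_count`? (no: SD.6, to R1); `floor_types[i] = get_bits(16)` (> 1 → error; 0 → F3); `g`, `partitions`, the partition-class loop 3985). -/
def SegF2 (Lay : Layout) (μ : Microarch) (u₀ : State) : Prop :=
  ∀ (g : Ghost) (i : Nat) (v : State), AtF2 u₀ g i v → ReachVia Lay μ WayInv v (fun w => AtR1 u₀ g w ∨ AtF3 u₀ g i w ∨ AtF4 u₀ g i w ∨ AtERR u₀ g w)

/-- **Segment `start_decoder.F3`** (a floor of type 0: six fields and the book list stored into the element, then `error(f, VORBIS_feature_not_supported)`). -/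
def SegF3 (Lay : Layout) (μ : Microarch) (u₀ : State) : Prop :=
  ∀ (g : Ghost) (i : Nat) (v : State), AtF3 u₀ g i v → ReachVia Lay μ WayInv v (fun w => AtERR u₀ g w)

/-- **Segment `start_decoder.F4`** (the class loops 3990 / 3997: class_dimensions, class_subclasses, class_masterbooks (range test), subclass_books (SIGNED range test)). -/
def SegF4 (Lay : Layout) (μ : Microarch) (u₀ : State) : Prop :=
  ∀ (g : Ghost) (i : Nat) (v : State), AtF4 u₀ g i v → ReachVia Lay μ WayInv v (fun w => AtF5 u₀ g i w ∨ AtERR u₀ g w)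

/-- **Segment `start_decoder.F5`** (floor1_multiplier, rangebits, `Xlist[0]`, `Xlist[1]`, `values = 2`, loops 4007 / 4009 (`values ≤ 249` at the Xlist store)). -/
def SegF5 (Lay : Layout) (μ : Microarch) (u₀ : State) : Prop :=
  ∀ (g : Ghost) (i : Nat) (v : State), AtF5 u₀ g i v → ReachVia Lay μ WayInv v (fun w => AtF6 u₀ g i w)

/-- **Segment `start_decoder.F6`** (loop 4015 fills `p[]`, `qsort(p, values, 4, point_compare)` (record preservation ⇒ PID), the duplicate-X test 4020, loop 4023 `sorted_order`). -/
def SegF6 (Lay : Layout) (μ : Microarch) (u₀ : State) : Prop :=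
  ∀ (g : Ghost) (i : Nat) (v : State), AtF6 u₀ g i v → ReachVia Lay μ WayInv v (fun w => AtF7 u₀ g i w ∨ AtERR u₀ g w)

/-- **Segment `start_decoder.F7`** (the neighbors loop 4026 (FL10 from XL and the post of `neighbors`), `longest_floorlist = max(·, values)`, `++i`). -/
def SegF7 (Lay : Layout) (μ : Microarch) (u₀ : State) : Prop :=
  ∀ (g : Ghost) (i : Nat) (v : State), AtF7 u₀ g i v → ReachVia Lay μ WayInv v (fun w => AtF2 u₀ g (i + 1) w)

/-- **Segment `start_decoder.R1`** (`residue_count = get_bits(6) + 1`, `residue_config = setup_malloc(32·rc)` (stored, then tested), memset, `i = 0`). -/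
def SegR1 (Lay : Layout) (μ : Microarch) (u₀ : State) : Prop :=
  ∀ (g : Ghost) (v : State), AtR1 u₀ g v → ReachVia Lay μ WayInv v (fun w => AtR2 u₀ g 0 w ∨ AtERR u₀ g w)

/-- **Segment `start_decoder.R2`** (the head of loop 4043; after it (SD.7) `mapping_count`, `mapping = setup_malloc(56·mc)`, memset, `i = 0`). -/
def SegR2 (Lay : Layout) (μ : Microarch) (u₀ : State) : Prop :=
  ∀ (g : Ghost) (i : Nat) (v : State), AtR2 u₀ g i v → ReachVia Lay μ WayInv v (fun w => AtR3 u₀ g i w ∨ AtR8 u₀ g 0 w ∨ AtERR u₀ g w)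

/-- **Segment `start_decoder.R3`** (`residue_types[i]`, begin, end, part_size, classifications, classbook and their three tests). -/
def SegR3 (Lay : Layout) (μ : Microarch) (u₀ : State) : Prop :=
  ∀ (g : Ghost) (i : Nat) (v : State), AtR3 u₀ g i v → ReachVia Lay μ WayInv v (fun w => AtR4 u₀ g i w ∨ AtERR u₀ g w)

/-- **Segment `start_decoder.R4`** (loop 4055 `residue_cascade[j]`; `residue_books = setup_malloc(16·cls)`). -/
def SegR4 (Lay : Layout) (μ : Microarch) (u₀ : State) : Prop :=
  ∀ (g : Ghost) (i : Nat) (v : State), AtR4 u₀ g i v → ReachVia Lay μ WayInv v (fun w => AtR5 u₀ g i w ∨ AtERR u₀ g w)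

/-- **Segment `start_decoder.R5`** (loops 4064 / 4065: `residue_books[j][k] = get_bits(8)` (tested `< codebook_count`) or −1). -/
def SegR5 (Lay : Layout) (μ : Microarch) (u₀ : State) : Prop :=
  ∀ (g : Ghost) (i : Nat) (v : State), AtR5 u₀ g i v → ReachVia Lay μ WayInv v (fun w => AtR6 u₀ g i w ∨ AtERR u₀ g w)

/-- **Segment `start_decoder.R6`** (`classdata = setup_malloc(8·E)`, memset, `j = 0`). -/
def SegR6 (Lay : Layout) (μ : Microarch) (u₀ : State) : Prop :=
  ∀ (g : Ghost) (i : Nat) (v : State), AtR6 u₀ g i v → ReachVia Lay μ WayInv v (fun w => AtR7 u₀ g i w ∨ AtERR u₀ g w)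

/-- **Segment `start_decoder.R7`** (loops 4079 / 4084: the rows `classdata[j] = setup_malloc(W)` and their class digits; then `++i`). -/
def SegR7 (Lay : Layout) (μ : Microarch) (u₀ : State) : Prop :=
  ∀ (g : Ghost) (i : Nat) (v : State), AtR7 u₀ g i v → ReachVia Lay μ WayInv v (fun w => AtR2 u₀ g (i + 1) w ∨ AtERR u₀ g w)

/-- **Segment `start_decoder.R8`** (the head of loop 4095; after it (SD.8) `mode_count = get_bits(6) + 1`, `i = 0`). -/
def SegR8 (Lay : Layout) (μ : Microarch) (u₀ : State) : Prop :=
  ∀ (g : Ghost) (i : Nat) (v : State), AtR8 u₀ g i v → ReachVia Lay μ WayInv v (fun w => AtR9 u₀ g i w ∨ AtR13 u₀ g 0 w)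

/-- **Segment `start_decoder.R9`** (mapping_type, `chan = setup_malloc(3·C)`, submaps, max_submaps, coupling_steps). -/
def SegR9 (Lay : Layout) (μ : Microarch) (u₀ : State) : Prop :=
  ∀ (g : Ghost) (i : Nat) (v : State), AtR9 u₀ g i v → ReachVia Lay μ WayInv v (fun w => AtR10 u₀ g i w ∨ AtR11 u₀ g i w ∨ AtERR u₀ g w)

/-- **Segment `start_decoder.R10`** (the coupling loop 4110: magnitude, angle = `get_bits(ilog(C − 1))`; three tests). -/
def SegR10 (Lay : Layout) (μ : Microarch) (u₀ : State) : Prop :=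
  ∀ (g : Ghost) (i : Nat) (v : State), AtR10 u₀ g i v → ReachVia Lay μ WayInv v (fun w => AtR11 u₀ g i w ∨ AtERR u₀ g w)

/-- **Segment `start_decoder.R11`** (the reserved bits; `mux[j] = get_bits(4)` tested `< submaps` (submaps > 1) or 0). -/
def SegR11 (Lay : Layout) (μ : Microarch) (u₀ : State) : Prop :=
  ∀ (g : Ghost) (i : Nat) (v : State), AtR11 u₀ g i v → ReachVia Lay μ WayInv v (fun w => AtR12 u₀ g i w ∨ AtERR u₀ g w)

/-- **Segment `start_decoder.R12`** (the submap loop 4132: `submap_floor[j]`, `submap_residue[j]` and their tests; then `++i`). -/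
def SegR12 (Lay : Layout) (μ : Microarch) (u₀ : State) : Prop :=
  ∀ (g : Ghost) (i : Nat) (v : State), AtR12 u₀ g i v → ReachVia Lay μ WayInv v (fun w => AtR8 u₀ g (i + 1) w ∨ AtERR u₀ g w)

/-- **Segment `start_decoder.R13`** (the head of loop 4143; after it (SD.9) `flush_packet`, `previous_length = 0`, `i = 0`). -/
def SegR13 (Lay : Layout) (μ : Microarch) (u₀ : State) : Prop :=
  ∀ (g : Ghost) (i : Nat) (v : State), AtR13 u₀ g i v → ReachVia Lay μ WayInv v (fun w => AtR14 u₀ g i w ∨ AtR15 u₀ g 0 w)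

/-- **Segment `start_decoder.R14`** (one mode record: blockflag, windowtype, transformtype, mapping and their three tests). -/
def SegR14 (Lay : Layout) (μ : Microarch) (u₀ : State) : Prop :=
  ∀ (g : Ghost) (i : Nat) (v : State), AtR14 u₀ g i v → ReachVia Lay μ WayInv v (fun w => AtR13 u₀ g (i + 1) w ∨ AtERR u₀ g w)

/-- **Segment `start_decoder.R15`** (the head of loop 4158; after it (SD.10) the two `init_blocksize` (0 → the epilogue), `blocksize[]` (SD.11), `max_part_read = 0`). -/
def SegR15 (Lay : Layout) (μ : Microarch) (u₀ : State) : Prop :=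
  ∀ (g : Ghost) (i : Nat) (v : State), AtR15 u₀ g i v → ReachVia Lay μ WayInv v (fun w => AtR16 u₀ g i w ∨ AtR17 u₀ g 0 w ∨ AtERR u₀ g w)

/-- **Segment `start_decoder.R16`** (`channel_buffers[i]`, `previous_window[i]`, `finalY[i] = setup_malloc`; the joint NULL test; memset). -/
def SegR16 (Lay : Layout) (μ : Microarch) (u₀ : State) : Prop :=
  ∀ (g : Ghost) (i : Nat) (v : State), AtR16 u₀ g i v → ReachVia Lay μ WayInv v (fun w => AtR15 u₀ g (i + 1) w ∨ AtERR u₀ g w)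

/-- **Segment `start_decoder.R17`** (the head of loop 4189; after it `temp_memory_required` (T1, FIX 9) and the final arena test (ARENA-FIX 1)). -/
def SegR17 (Lay : Layout) (μ : Microarch) (u₀ : State) : Prop :=
  ∀ (g : Ghost) (i : Nat) (v : State), AtR17 u₀ g i v → ReachVia Lay μ WayInv v (fun w => AtR18 u₀ g i w ∨ AtR19 u₀ g w ∨ AtERR u₀ g w)

/-- **Segment `start_decoder.R18`** (one residue of the estimate: actual_size (FIX 9), part_read, the running maximum). -/
def SegR18 (Lay : Layout) (μ : Microarch) (u₀ : State) : Prop :=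
  ∀ (g : Ghost) (i : Nat) (v : State), AtR18 u₀ g i v → ReachVia Lay μ WayInv v (fun w => AtR17 u₀ g (i + 1) w)

/-- **Segment `start_decoder.R19`** (first_audio_page_offset; `return TRUE` (eax = dword `[R + 20H]` = 1)). -/
def SegR19 (Lay : Layout) (μ : Microarch) (u₀ : State) : Prop :=
  ∀ (g : Ghost) (v : State), AtR19 u₀ g v → ReachVia Lay μ WayInv v (fun w => AtERR u₀ g w)

/-- **Segment `start_decoder.ERR`** (the single epilogue: the frame's shadow is zeroed (`ShadowInv.epilogue_ra`), the six registers are popped, `ret`). -/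
def SegERR (Lay : Layout) (μ : Microarch) (u₀ : State) : Prop :=
  ∀ (g : Ghost) (v : State), AtERR u₀ g v → ReachVia Lay μ WayInv v (fun w => AtRet u₀ g w)

end StartDecoder

end Vorbis.Spec
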